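-- pv_equiv track=rewrite | github.com/jackytck/checkio | SafeCoasts.py | finish_map
-- ===== SOURCE A (Python) =====
-- from collections import deque, defaultdict
--
-- def finish_map(regional_map):
--     w, h = len(regional_map), len(regional_map[0])
--     m = [['.' for x in range(h)] for y in range(w)]
--     q = deque([])
--
--     # dilation of coasts
--     for i, x in enumerate(regional_map):
--         for j, y in enumerate(x):
--             if y == 'D':
--                 q.append((i, j))
--             elif y == 'X':
--                 m[i][j] = 'X'
--                 for dx in range(-1, 2):
--                     for dy in range(-1, 2):
--                         px, py = i + dx, j + dy
--                         if (0 <= px < w and 0 <= py < h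
--                                 and regional_map[px][py] == '.'):
--                             m[px][py] = 'S'
--
--     # bfs of ships
--     visit = defaultdict(bool)
--     while q:
--         v = q.popleft()
--         if visit[v]:
--             continue
--         visit[v] = True
--         x, y = v
--         m[x][y] = 'D'
--         for dx, dy in ((0, -1), (0, 1), (-1, 0), (1, 0)):
--             px, py = x + dx, y + dy
--             if 0 <= px < w and 0 <= py < h and m[px][py] == '.':
--                 q.append((px, py))
--
--     # the rest
--     for i, x in enumerate(m):
--         for j, y in enumerate(x):
--             if y == '.':
--                 m[i][j] = 'S'
--
--     return [''.join(x) for x in m]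
-- ===== SOURCE B (Python) =====
-- def finish_map(regional_map):
--     w, h = len(regional_map), len(regional_map[0])
--
--     def dilated(i, j):
--         c = regional_map[i][j]
--         if c == 'X':
--             return 'X'
--         if c == '.' and any(
--                 0 <= i + dx < w and 0 <= j + dy < h
--                 and regional_map[i + dx][j + dy] == 'X'
--                 for dx in (-1, 0, 1) for dy in (-1, 0, 1)):
--             return 'S'
--         return '.'
--
--     base = [[dilated(i, j) for j in range(h)] for i in range(w)]
--
--     # union-find (roots point to the smallest index of their class) over the
--     # free cells of the dilated map, one union per right/down neighbour pair
--     parent = list(range(w * h))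
--
--     def find(a):
--         while parent[a] != a:
--             a = parent[a]
--         return a
--
--     def union(a, b):
--         ra, rb = find(a), find(b)
--         if ra != rb:
--             parent[max(ra, rb)] = min(ra, rb)
--
--     for i in range(w):
--         for j in range(h):
--             if base[i][j] == '.':
--                 if i + 1 < w and base[i + 1][j] == '.':
--                     union(i * h + j, (i + 1) * h + j)
--                 if j + 1 < h and base[i][j + 1] == '.':
--                     union(i * h + j, i * h + j + 1)
--
--     ship_roots = {find(i * h + j) for i in range(w) for j in range(h)
--                   if regional_map[i][j] == 'D'}
--
--     return [''.join('D' if base[i][j] == '.' and find(i * h + j) in ship_roots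
--                     else ('S' if base[i][j] == '.' else base[i][j])
--                     for j in range(h))
--             for i in range(w)]
-- ===== Notes on version B (the rewrite author's own statement) =====
-- stated objective: alternative
-- what changed: Coast dilation becomes a per-cell gather (each cell asks whether an 8-neighbour is 'X'), and A's deque BFS wavefront from the ships is replaced by union-find connected-component labelling: right/down neighbour pairs of free cells are unioned, the roots of the components containing a 'D' seed are collected, and each free cell is marked 'D' or 'S' by a root lookup instead of by flood traversal.
-- outside the precondition, e.g. on finish_map(['..', '.']): A returns ['SS', 'SS'], B raises IndexError
import Mathlib
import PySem

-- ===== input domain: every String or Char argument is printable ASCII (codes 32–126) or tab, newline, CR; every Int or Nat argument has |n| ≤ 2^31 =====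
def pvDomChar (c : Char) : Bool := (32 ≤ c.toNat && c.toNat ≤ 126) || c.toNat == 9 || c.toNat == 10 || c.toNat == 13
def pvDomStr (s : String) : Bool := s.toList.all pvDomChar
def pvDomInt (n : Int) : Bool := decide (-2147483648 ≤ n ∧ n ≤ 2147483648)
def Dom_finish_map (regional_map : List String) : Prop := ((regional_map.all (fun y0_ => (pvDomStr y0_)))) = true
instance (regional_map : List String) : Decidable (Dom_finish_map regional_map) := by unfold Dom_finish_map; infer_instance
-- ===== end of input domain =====

-- B replaces A's scatter-style coast dilation by a per-cell gather dilation, and A's deque BFS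
-- flood from the ships by union-find connected-component labelling over the free cells
-- (objective: alternative, same result, no speed claim).

-- ===== PORT A =====

-- grid helpers shared by both ports: grid[i][j] as an Option (none = IndexError), and grid[i][j] = c
def pvCell (g : List (List Char)) (i j : Int) : Option Char :=
  (PySem.List.pyGet? g i).bind (fun r => PySem.List.pyGet? r j)

-- m[i][j] = c; every call site guards 0 ≤ i < len(m) and 0 ≤ j < len(m[i]), where pySetD is exact
def pvSet2 (g : List (List Char)) (i j : Int) (c : Char) : List (List Char) :=
  PySem.List.pySetD g i (PySem.List.pySetD (PySem.List.pyGetD g i []) j c)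

-- the BFS while-loop of A; the fuel argument only makes the recursion structural (chosen large enough)
def pvBfsA (w h : Int) : Nat → List (Int × Int) → PySem.Dict (Int × Int) Bool → List (List Char) → List (List Char)
  | 0, _, _, m => m
  | _ + 1, [], _, m => m
  | fuel + 1, v :: rest, visit, m =>
    if visit.getD v false then pvBfsA w h fuel rest visit m
    else
      let visit' := visit.insert v true
      let m' := pvSet2 m v.1 v.2 'D'
      let q' := [((0:Int), (-1:Int)), (0, 1), (-1, 0), (1, 0)].foldl (fun acc d =>
          let px := v.1 + d.1
          let py := v.2 + d.2
          if 0 ≤ px ∧ px < w ∧ 0 ≤ py ∧ py < h ∧ pvCell m' px py = some '.' then acc ++ [(px, py)]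
          else acc) rest
      pvBfsA w h fuel q' visit' m'

def finish_map (regional_map : List String) : List String :=
  let w : Nat := regional_map.length
  let h : Nat := (regional_map.headD "").length
  let rmc : List (List Char) := regional_map.map String.toList
  let m0 : List (List Char) := List.replicate w (List.replicate h '.')
  let st := (PySem.List.enumerate rmc).foldl
    (fun (st : List (Int × Int) × List (List Char)) ix =>
      (PySem.List.enumerate ix.2).foldl
        (fun st2 jy =>
          if jy.2 = 'D' then (st2.1 ++ [(ix.1, jy.1)], st2.2)
          else if jy.2 = 'X' then
            (st2.1, (PySem.List.pyRange (-1) 2 1).foldl (fun mm dx =>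
                (PySem.List.pyRange (-1) 2 1).foldl (fun mm2 dy =>
                    if 0 ≤ ix.1 + dx ∧ ix.1 + dx < (w : Int) ∧ 0 ≤ jy.1 + dy ∧ jy.1 + dy < (h : Int)
                        ∧ pvCell rmc (ix.1 + dx) (jy.1 + dy) = some '.'
                    then pvSet2 mm2 (ix.1 + dx) (jy.1 + dy) 'S' else mm2) mm)
              (pvSet2 st2.2 ix.1 jy.1 'X'))
          else st2) st)
    (([] : List (Int × Int)), m0)
  let mf := pvBfsA (w : Int) (h : Int) (5 * w * h + st.1.length + 1) st.1 PySem.Dict.empty st.2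
  (mf.map (fun row => row.map (fun c => if c = '.' then 'S' else c))).map (fun row => String.ofList row)

-- ===== PORT B =====

def pvOffs9 : List (Int × Int) :=
  [(-1, -1), (-1, 0), (-1, 1), (0, -1), (0, 0), (0, 1), (1, -1), (1, 0), (1, 1)]

-- B's dilated(i, j): gather from the 8-neighbourhood
def pvDilB (g : List (List Char)) (w h : Nat) (i j : Nat) : Char :=
  if pvCell g i j = some 'X' then 'X'
  else if pvCell g i j = some '.' ∧ pvOffs9.any (fun d =>
      decide (0 ≤ (i : Int) + d.1 ∧ (i : Int) + d.1 < (w : Int) ∧ 0 ≤ (j : Int) + d.2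
        ∧ (j : Int) + d.2 < (h : Int)
        ∧ pvCell g ((i : Int) + d.1) ((j : Int) + d.2) = some 'X')) then 'S'
  else '.'

-- B's find: follow parent pointers until a fixpoint; the fuel a+1 only makes the while-loop
-- structural (parents always point to smaller-or-equal indices, so a+1 steps suffice exactly)
def pvFind (parent : List Nat) : Nat → Nat → Nat
  | 0, a => a
  | fuel + 1, a =>
    if parent.getD a a = a then a else pvFind parent fuel (parent.getD a a)

def pvRoot (parent : List Nat) (a : Nat) : Nat := pvFind parent (a + 1) a

-- B's union: point the larger of the two roots at the smaller
def pvUnionUF (parent : List Nat) (a b : Nat) : List Nat :=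
  let ra := pvRoot parent a
  let rb := pvRoot parent b
  if ra = rb then parent else parent.set (max ra rb) (min ra rb)

def finish_map_alt (regional_map : List String) : List String :=
  let w : Nat := regional_map.length
  let h : Nat := (regional_map.headD "").length
  let rmc : List (List Char) := regional_map.map String.toList
  let base : List (List Char) := (List.range w).map (fun i => (List.range h).map (fun j => pvDilB rmc w h i j))
  let parent : List Nat := (List.range w).foldl (fun p i => (List.range h).foldl (fun p j =>
      if pvCell base ((i : Nat) : Int) ((j : Nat) : Int) = some '.' then
        let p1 := if i + 1 < w ∧ pvCell base (((i + 1 : Nat)) : Int) ((j : Nat) : Int) = some '.'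
          then pvUnionUF p (i * h + j) ((i + 1) * h + j) else p
        if j + 1 < h ∧ pvCell base ((i : Nat) : Int) (((j + 1 : Nat)) : Int) = some '.'
          then pvUnionUF p1 (i * h + j) (i * h + j + 1) else p1
      else p) p) (List.range (w * h))
  let shipRoots : PySem.Set Nat := PySem.Set.ofList ((List.range w).flatMap (fun i =>
      ((List.range h).filter (fun j => pvCell rmc ((i : Nat) : Int) ((j : Nat) : Int) = some 'D')).map
        (fun j => pvRoot parent (i * h + j))))
  (List.range w).map (fun i => String.ofList ((List.range h).map (fun j =>
    if pvCell base ((i : Nat) : Int) ((j : Nat) : Int) = some '.'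
        ∧ PySem.Set.contains shipRoots (pvRoot parent (i * h + j)) then 'D'
    else if pvCell base ((i : Nat) : Int) ((j : Nat) : Int) = some '.' then 'S'
    else (pvCell base ((i : Nat) : Int) ((j : Nat) : Int)).getD '.')))

-- ===== PRECONDITION & SPEC =====
-- Pre_ excludes the empty map (A raises IndexError on regional_map[0]) and ragged maps, on which A
-- may raise IndexError or silently ignore/truncate cells outside the first row's width.
def Pre_finish_map (regional_map : List String) : Prop :=
  regional_map ≠ [] ∧
    ∀ s ∈ regional_map, (regional_map.headD "").toList.length ≤ s.toList.length ∧
      ((s.toList.drop ((regional_map.headD "").toList.length)).all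
        (fun c => !(c == 'D' || c == 'X'))) = true
instance (regional_map : List String) : Decidable (Pre_finish_map regional_map) := by
  unfold Pre_finish_map; infer_instance

def pvWitness_finish_map : List String := ["D."]

def Spec_finish_map (regional_map : List String) (out : List String) : Prop := out = finish_map_alt regional_map
instance (regional_map : List String) (out : List String) : Decidable (Spec_finish_map regional_map out) := by unfold Spec_finish_map; infer_instance

-- ===== CLAIM (what is proved, stated in full; the proofs are below) =====
def Claim_equal_finish_map : Prop := ∀ (regional_map : List String), Dom_finish_map regional_map → Pre_finish_map regional_map → Spec_finish_map regional_map (finish_map regional_map)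

-- ===== LEMMAS AND PROOFS =====

abbrev pvInb (w h : Nat) (p : Int × Int) : Prop :=
  0 ≤ p.1 ∧ p.1 < (w : Int) ∧ 0 ≤ p.2 ∧ p.2 < (h : Int)

def pvNbrs4 (p : Int × Int) : List (Int × Int) :=
  [(p.1, p.2 - 1), (p.1, p.2 + 1), (p.1 - 1, p.2), (p.1 + 1, p.2)]

def pvRel (base : List (List Char)) (w h : Nat) (vis : Finset (Int × Int)) (a b : Int × Int) : Prop :=
  b ∈ pvNbrs4 a ∧ pvInb w h b ∧ pvCell base b.1 b.2 = some '.' ∧ b ∉ vis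

def pvClosure (base : List (List Char)) (w h : Nat) (q : List (Int × Int))
    (vis : Finset (Int × Int)) (v : Int × Int) : Prop :=
  v ∈ vis ∨ ∃ u ∈ q, u ∉ vis ∧ Relation.ReflTransGen (pvRel base w h vis) u v

lemma pvRel_mono {base w h} {vis : Finset (Int × Int)} {u a b : Int × Int}
    (hr : pvRel base w h (insert u vis) a b) : pvRel base w h vis a b :=
  ⟨hr.1, hr.2.1, hr.2.2.1, fun hm => hr.2.2.2 (Finset.mem_insert_of_mem hm)⟩

lemma pvRtgA {base w h} {vis : Finset (Int × Int)} {u v : Int × Int}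
    (hr : Relation.ReflTransGen (pvRel base w h vis) u v) :
    v = u ∨ ∃ wp, pvRel base w h (insert u vis) u wp ∧
      Relation.ReflTransGen (pvRel base w h (insert u vis)) wp v := by
  induction hr with
  | refl => exact Or.inl rfl
  | @tail v' v hr hstep ih =>
    by_cases hvu : v = u
    · exact Or.inl hvu
    · rcases ih with h1 | ⟨wp, hw, hp⟩
      · subst h1
        refine Or.inr ⟨v, ⟨hstep.1, hstep.2.1, hstep.2.2.1, ?_⟩, Relation.ReflTransGen.refl⟩
        simp [Finset.mem_insert, hvu, hstep.2.2.2]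
      · refine Or.inr ⟨wp, hw, hp.tail ⟨hstep.1, hstep.2.1, hstep.2.2.1, ?_⟩⟩
        simp [Finset.mem_insert, hvu, hstep.2.2.2]

lemma pvRtgB {base w h} {vis : Finset (Int × Int)} {u w0 v : Int × Int}
    (hr : Relation.ReflTransGen (pvRel base w h vis) w0 v) :
    Relation.ReflTransGen (pvRel base w h (insert u vis)) w0 v ∨
      Relation.ReflTransGen (pvRel base w h vis) u v := by
  induction hr with
  | refl => exact Or.inl Relation.ReflTransGen.refl
  | @tail v' v hr hstep ih =>
    rcases ih with h1 | h2
    · by_cases hvu : v = u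
      · subst hvu; exact Or.inr Relation.ReflTransGen.refl
      · exact Or.inl (h1.tail ⟨hstep.1, hstep.2.1, hstep.2.2.1, by
          simp [Finset.mem_insert, hvu, hstep.2.2.2]⟩)
    · exact Or.inr (h2.tail hstep)

lemma pvClosure_skip {base w h} {u : Int × Int} {t : List (Int × Int)} {vis : Finset (Int × Int)}
    (hu : u ∈ vis) (v : Int × Int) :
    pvClosure base w h (u :: t) vis v ↔ pvClosure base w h t vis v := by
  unfold pvClosure
  constructor <;> rintro (h | ⟨x, hx, h1, h2⟩)
  · exact Or.inl h
  · rcases List.mem_cons.1 hx with rfl | hx'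
    · exact absurd hu h1
    · exact Or.inr ⟨x, hx', h1, h2⟩
  · exact Or.inl h
  · exact Or.inr ⟨x, List.mem_cons_of_mem u hx, h1, h2⟩

lemma pvClosure_step {base w h} {vis : Finset (Int × Int)} {u : Int × Int}
    {t q' : List (Int × Int)} (hu : u ∉ vis)
    (hq' : ∀ p, p ∈ q' ↔ p ∈ t ∨ pvRel base w h (insert u vis) u p) (v : Int × Int) :
    pvClosure base w h q' (insert u vis) v ↔ pvClosure base w h (u :: t) vis v := by
  unfold pvClosure
  constructor
  · rintro (h | ⟨x, hx, h1, h2⟩)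
    · rcases Finset.mem_insert.1 h with rfl | h'
      · exact Or.inr ⟨v, List.mem_cons_self, hu, Relation.ReflTransGen.refl⟩
      · exact Or.inl h'
    · rcases (hq' x).1 hx with hxt | hxn
      · exact Or.inr ⟨x, List.mem_cons_of_mem u hxt, fun hm => h1 (Finset.mem_insert_of_mem hm),
          h2.mono (fun a b => pvRel_mono)⟩
      · -- x is a fresh neighbour of u
        have hrel : pvRel base w h vis u x := pvRel_mono hxn
        exact Or.inr ⟨u, List.mem_cons_self, hu,
          Relation.ReflTransGen.head hrel (h2.mono (fun a b => pvRel_mono))⟩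
  · rintro (h | ⟨x, hx, h1, h2⟩)
    · exact Or.inl (Finset.mem_insert_of_mem h)
    · by_cases hxu : x = u
      · subst hxu
        rcases pvRtgA h2 with rfl | ⟨wp, hw, hp⟩
        · exact Or.inl (Finset.mem_insert_self v vis)
        · exact Or.inr ⟨wp, (hq' wp).2 (Or.inr hw), hw.2.2.2, hp⟩
      · rcases List.mem_cons.1 hx with h' | hxt
        · exact absurd h' hxu
        · rcases pvRtgB (u := u) h2 with hA | hB
          · exact Or.inr ⟨x, (hq' x).2 (Or.inl hxt), by
              simp [Finset.mem_insert, hxu, h1], hA⟩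
          · rcases pvRtgA hB with rfl | ⟨wp, hw, hp⟩
            · exact Or.inl (Finset.mem_insert_self v vis)
            · exact Or.inr ⟨wp, (hq' wp).2 (Or.inr hw), hw.2.2.2, hp⟩

def pvShape (w h : Nat) (g : List (List Char)) : Prop :=
  g.length = w ∧ ∀ r ∈ g, r.length = h

lemma pvCell_nonneg (g : List (List Char)) {i j : Int} (hi : 0 ≤ i) (hj : 0 ≤ j) :
    pvCell g i j = (g[i.toNat]?.bind (fun r => r[j.toNat]?)) := by
  unfold pvCell
  rw [PySem.List.pyGet?_of_nonneg _ hi]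
  cases hg : g[i.toNat]? with
  | none => rfl
  | some r => simp [PySem.List.pyGet?_of_nonneg _ hj]

lemma pvSet2_eq {w h : Nat} {g : List (List Char)} (hs : pvShape w h g) {i j : Int}
    (hij : pvInb w h (i, j)) (c : Char) {row : List Char} (hrow : g[i.toNat]? = some row) :
    pvSet2 g i j c = g.set i.toNat (row.set j.toNat c) := by
  obtain ⟨h1, h2, h3, h4⟩ := hij
  unfold pvSet2
  rw [PySem.List.pySetD_of_nonneg _ _ h1, PySem.List.pyGetD_of_nonneg _ _ h1,
    PySem.List.pySetD_of_nonneg _ _ h3, List.getD_eq_getElem?_getD, hrow]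
  rfl

lemma pvShape_set2 {w h : Nat} {g : List (List Char)} (hs : pvShape w h g) {i j : Int}
    (hij : pvInb w h (i, j)) (c : Char) : pvShape w h (pvSet2 g i j c) := by
  obtain ⟨h1, h2, h3, h4⟩ := hij
  have hig : i.toNat < g.length := by have := hs.1; simp only at h1 h2; omega
  have hrow : g[i.toNat]? = some g[i.toNat] := List.getElem?_eq_getElem hig
  rw [pvSet2_eq hs ⟨h1, h2, h3, h4⟩ c hrow]
  refine ⟨by simpa using hs.1, fun r hr => ?_⟩
  rcases List.mem_or_eq_of_mem_set hr with hr' | rfl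
  · exact hs.2 r hr'
  · simpa using hs.2 _ (List.getElem_mem hig)

lemma pvCell_set2 {w h : Nat} {g : List (List Char)} (hs : pvShape w h g) {i j : Int}
    (hij : pvInb w h (i, j)) (c : Char) {a b : Int} (ha : 0 ≤ a) (hb : 0 ≤ b) :
    pvCell (pvSet2 g i j c) a b = if a = i ∧ b = j then some c else pvCell g a b := by
  obtain ⟨h1, h2, h3, h4⟩ := hij
  simp only at h1 h2 h3 h4
  have hig : i.toNat < g.length := by have := hs.1; omega
  have hrow : g[i.toNat]? = some g[i.toNat] := List.getElem?_eq_getElem hig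
  have hrl : g[i.toNat].length = h := hs.2 _ (List.getElem_mem hig)
  rw [pvSet2_eq hs ⟨h1, h2, h3, h4⟩ c hrow, pvCell_nonneg _ ha hb, pvCell_nonneg g ha hb]
  by_cases hai : a = i
  · subst hai
    rw [List.getElem?_set_self hig]
    by_cases hbj : b = j
    · subst hbj
      have hx : (g[a.toNat].set b.toNat c)[b.toNat]? = some c :=
        List.getElem?_set_self (by omega)
      simp [hx]
    · have hx : (g[a.toNat].set j.toNat c)[b.toNat]? = g[a.toNat][b.toNat]? :=
        List.getElem?_set_ne (by omega)
      simp [hx, hbj, hrow]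
  · have hx : (g.set i.toNat (g[i.toNat].set j.toNat c))[a.toNat]? = g[a.toNat]? :=
      List.getElem?_set_ne (by omega)
    simp [hx, hai]

def pvGrid (w h : Nat) : Finset (Int × Int) :=
  (Finset.range w ×ˢ Finset.range h).image (fun p => ((p.1 : Int), (p.2 : Int)))

lemma mem_pvGrid {w h : Nat} {p : Int × Int} : p ∈ pvGrid w h ↔ pvInb w h p := by
  unfold pvGrid pvInb
  simp only [Finset.mem_image, Finset.mem_product, Finset.mem_range, Prod.exists]
  constructor
  · rintro ⟨a, b, ⟨ha, hb⟩, rfl⟩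
    refine ⟨by positivity, ?_, by positivity, ?_⟩ <;> simp <;> omega
  · rintro ⟨h1, h2, h3, h4⟩
    exact ⟨p.1.toNat, p.2.toNat, ⟨by omega, by omega⟩, by
      simp only [Prod.ext_iff]; constructor <;> simp <;> omega⟩

lemma card_pvGrid (w h : Nat) : (pvGrid w h).card = w * h := by
  unfold pvGrid
  rw [Finset.card_image_of_injective _ (fun p q hpq => by
    simpa [Prod.ext_iff, Nat.cast_inj] using hpq)]
  simp

lemma pvMem_push_fold (u : Int × Int) (P : Int × Int → Prop) [DecidablePred P]
    (rest : List (Int × Int)) (p : Int × Int) :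
    p ∈ ([((0:Int), (-1:Int)), (0, 1), (-1, 0), (1, 0)].foldl
        (fun acc d => if P (u.1 + d.1, u.2 + d.2) then acc ++ [(u.1 + d.1, u.2 + d.2)] else acc) rest)
      ↔ p ∈ rest ∨ (p ∈ pvNbrs4 u ∧ P p) := by
  simp only [List.foldl_cons, List.foldl_nil, pvNbrs4, List.mem_cons, List.not_mem_nil,
    add_zero, ← sub_eq_add_neg]
  split_ifs <;> simp [List.mem_append] <;> aesop

lemma pvLen_push_fold (u : Int × Int) (P : Int × Int → Prop) [DecidablePred P]
    (rest : List (Int × Int)) :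
    ([((0:Int), (-1:Int)), (0, 1), (-1, 0), (1, 0)].foldl
        (fun acc d => if P (u.1 + d.1, u.2 + d.2) then acc ++ [(u.1 + d.1, u.2 + d.2)] else acc) rest).length
      ≤ rest.length + 4 := by
  simp only [List.foldl_cons, List.foldl_nil]
  split_ifs <;> simp <;> omega

lemma pvClosure_nil {base : List (List Char)} {w h : Nat} {vis : Finset (Int × Int)}
    {p : Int × Int} : pvClosure base w h [] vis p ↔ p ∈ vis := by
  simp [pvClosure]

lemma pvBfsA_spec (base : List (List Char)) (w h : Nat) :
    ∀ (fuel : Nat) (q : List (Int × Int)) (visit : PySem.Dict (Int × Int) Bool)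
      (m : List (List Char)) (vis : Finset (Int × Int)),
      (∀ p, visit.getD p false = true ↔ p ∈ vis) →
      (∀ p ∈ q, pvInb w h p) →
      vis ⊆ pvGrid w h →
      pvShape w h m →
      (∀ p, pvInb w h p → pvCell m p.1 p.2 = if p ∈ vis then some 'D' else pvCell base p.1 p.2) →
      5 * (pvGrid w h \ vis).card + q.length ≤ fuel →
      pvShape w h (pvBfsA (w : Int) (h : Int) fuel q visit m) ∧
      ∀ p, pvInb w h p →
        (pvClosure base w h q vis p →
          pvCell (pvBfsA (w : Int) (h : Int) fuel q visit m) p.1 p.2 = some 'D') ∧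
        (¬ pvClosure base w h q vis p →
          pvCell (pvBfsA (w : Int) (h : Int) fuel q visit m) p.1 p.2 = pvCell base p.1 p.2) := by
  intro fuel
  induction fuel with
  | zero =>
    intro q visit m vis hvis hq hsub hsh hov hfuel
    refine ⟨hsh, fun p hp => ⟨fun hc => ?_, fun hc => ?_⟩⟩
    · have hq0 : q = [] := by cases q with
        | nil => rfl
        | cons a t => exfalso; simp [List.length_cons] at hfuel
      subst hq0
      have hmem := (pvClosure_nil).1 hc
      rw [show pvBfsA (w : Int) (h : Int) 0 [] visit m = m from rfl, hov p hp, if_pos hmem]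
    · have hq0 : q = [] := by cases q with
        | nil => rfl
        | cons a t => exfalso; simp [List.length_cons] at hfuel
      subst hq0
      have hnm := hc ∘ (pvClosure_nil (base := base)).2
      rw [show pvBfsA (w : Int) (h : Int) 0 [] visit m = m from rfl, hov p hp,
        if_neg (fun hm => hnm hm)]
  | succ fuel ih =>
    intro q visit m vis hvis hq hsub hsh hov hfuel
    cases q with
    | nil =>
      refine ⟨hsh, fun p hp => ⟨fun hc => ?_, fun hc => ?_⟩⟩
      · rw [show pvBfsA (w : Int) (h : Int) (fuel + 1) [] visit m = m from rfl,
          hov p hp, if_pos ((pvClosure_nil).1 hc)]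
      · rw [show pvBfsA (w : Int) (h : Int) (fuel + 1) [] visit m = m from rfl,
          hov p hp, if_neg (fun hm => hc (pvClosure_nil.2 hm))]
    | cons u rest =>
      have hu_inb : pvInb w h u := hq u List.mem_cons_self
      by_cases hvb : visit.getD u false = true
      · -- already visited: skip
        have hstep : pvBfsA (w : Int) (h : Int) (fuel + 1) (u :: rest) visit m
            = pvBfsA (w : Int) (h : Int) fuel rest visit m := by
          simp [pvBfsA, hvb]
        have hu_vis : u ∈ vis := (hvis u).1 hvb
        obtain ⟨hsh', hpt⟩ := ih rest visit m vis hvis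
          (fun p hp => hq p (List.mem_cons_of_mem _ hp)) hsub hsh hov
          (by simp [List.length_cons] at hfuel; omega)
        rw [hstep]
        refine ⟨hsh', fun p hp => ⟨fun hc => (hpt p hp).1 ((pvClosure_skip hu_vis p).1 hc),
          fun hc => (hpt p hp).2 (fun hc' => hc ((pvClosure_skip hu_vis p).2 hc'))⟩⟩
      · -- fresh cell u: mark it and push its neighbours
        have hu_vis : u ∉ vis := fun hm => hvb ((hvis u).2 hm)
        set m' := pvSet2 m u.1 u.2 'D' with hm'def
        set visit' := visit.insert u true with hvisit'def
        set q' := [((0:Int), (-1:Int)), (0, 1), (-1, 0), (1, 0)].foldl (fun acc d =>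
            let px := u.1 + d.1
            let py := u.2 + d.2
            if 0 ≤ px ∧ px < (w : Int) ∧ 0 ≤ py ∧ py < (h : Int) ∧ pvCell m' px py = some '.'
            then acc ++ [(px, py)] else acc) rest with hq'def
        have hstep : pvBfsA (w : Int) (h : Int) (fuel + 1) (u :: rest) visit m
            = pvBfsA (w : Int) (h : Int) fuel q' visit' m' := by
          rw [hq'def, hvisit'def, hm'def]
          simp [pvBfsA, hvb]
        have hsh' : pvShape w h m' := pvShape_set2 hsh hu_inb 'D'
        have hov' : ∀ p, pvInb w h p →
            pvCell m' p.1 p.2 = if p ∈ insert u vis then some 'D' else pvCell base p.1 p.2 := by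
          intro p hp
          rw [hm'def, pvCell_set2 hsh hu_inb 'D' hp.1 hp.2.2.1]
          by_cases hpu : p = u
          · subst hpu
            simp
          · rw [if_neg (fun hcomp => hpu (Prod.ext_iff.2 hcomp)), hov p hp]
            exact if_congr (by simp [Finset.mem_insert, hpu]) rfl rfl
        have hvis' : ∀ p, visit'.getD p false = true ↔ p ∈ insert u vis := by
          intro p
          rw [hvisit'def, PySem.Dict.getD_insert]
          by_cases hpu : p = u <;> simp [hpu, hvis p, Finset.mem_insert]
        have hPrel : ∀ p, (p ∈ pvNbrs4 u ∧ (0 ≤ p.1 ∧ p.1 < (w : Int) ∧ 0 ≤ p.2 ∧ p.2 < (h : Int)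
              ∧ pvCell m' p.1 p.2 = some '.')) ↔ pvRel base w h (insert u vis) u p := by
          intro p
          constructor
          · rintro ⟨hn, h1, h2, h3, h4, h5⟩
            have hp : pvInb w h p := ⟨h1, h2, h3, h4⟩
            have hcell := hov' p hp
            by_cases hpm : p ∈ insert u vis
            · rw [if_pos hpm] at hcell
              rw [h5] at hcell
              exact absurd (Option.some.inj hcell) (by decide)
            · rw [if_neg hpm] at hcell
              exact ⟨hn, hp, by rw [← hcell, h5], hpm⟩
          · rintro ⟨hn, hinb, hdot, hnotm⟩
            refine ⟨hn, hinb.1, hinb.2.1, hinb.2.2.1, hinb.2.2.2, ?_⟩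
            rw [hov' p hinb, if_neg hnotm]
            exact hdot
        have hmemQ : ∀ p, p ∈ q' ↔ p ∈ rest ∨ pvRel base w h (insert u vis) u p := by
          intro p
          rw [hq'def]
          exact (pvMem_push_fold u (fun t => 0 ≤ t.1 ∧ t.1 < (w : Int) ∧ 0 ≤ t.2 ∧ t.2 < (h : Int)
            ∧ pvCell m' t.1 t.2 = some '.') rest p).trans (or_congr Iff.rfl (hPrel p))
        have hq'inb : ∀ p ∈ q', pvInb w h p := by
          intro p hp
          rcases (hmemQ p).1 hp with hcase | hcase
          · exact hq p (List.mem_cons_of_mem _ hcase)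
          · exact hcase.2.1
        have hsub' : insert u vis ⊆ pvGrid w h := by
          intro x hx
          rcases Finset.mem_insert.1 hx with rfl | hx'
          · exact mem_pvGrid.2 hu_inb
          · exact hsub hx'
        have hu_g : u ∈ pvGrid w h \ vis := Finset.mem_sdiff.2 ⟨mem_pvGrid.2 hu_inb, hu_vis⟩
        have hcard : (pvGrid w h \ insert u vis).card + 1 = (pvGrid w h \ vis).card := by
          rw [Finset.sdiff_insert, Finset.card_erase_of_mem hu_g]
          have hpos : 0 < (pvGrid w h \ vis).card := Finset.card_pos.2 ⟨u, hu_g⟩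
          omega
        have hlen : q'.length ≤ rest.length + 4 := by
          rw [hq'def]
          exact pvLen_push_fold u (fun t => 0 ≤ t.1 ∧ t.1 < (w : Int) ∧ 0 ≤ t.2 ∧ t.2 < (h : Int)
            ∧ pvCell m' t.1 t.2 = some '.') rest
        have hfuel' : 5 * (pvGrid w h \ insert u vis).card + q'.length ≤ fuel := by
          simp only [List.length_cons] at hfuel
          omega
        obtain ⟨hshf, hptf⟩ := ih q' visit' m' (insert u vis) hvis' hq'inb hsub' hsh' hov' hfuel'
        have hconv : ∀ v, pvClosure base w h q' (insert u vis) v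
            ↔ pvClosure base w h (u :: rest) vis v :=
          fun v => pvClosure_step hu_vis hmemQ v
        rw [hstep]
        exact ⟨hshf, fun p hp => ⟨fun hc => (hptf p hp).1 ((hconv p).2 hc),
          fun hc => (hptf p hp).2 (fun hc' => hc ((hconv p).1 hc'))⟩⟩

-- ===== union-find lemmas (B's flood replacement) =====

lemma pvFind_succ (p : List Nat) (fuel a : Nat) :
    pvFind p (fuel + 1) a = if p.getD a a = a then a else pvFind p fuel (p.getD a a) := rfl

lemma pvFind_irrel {p : List Nat} (hmono : ∀ a, p.getD a a ≤ a) :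
    ∀ a fuel, a < fuel → pvFind p fuel a = pvRoot p a := by
  intro a
  induction a using Nat.strong_induction_on with
  | _ a ih =>
    intro fuel hf
    obtain ⟨f, rfl⟩ : ∃ f, fuel = f + 1 := ⟨fuel - 1, by omega⟩
    by_cases hpa : p.getD a a = a
    · rw [pvFind_succ, if_pos hpa, pvRoot, pvFind_succ, if_pos hpa]
    · have hlt : p.getD a a < a := lt_of_le_of_ne (hmono a) hpa
      rw [pvFind_succ, if_neg hpa, pvRoot, pvFind_succ, if_neg hpa,
        ih _ hlt _ (by omega), ih _ hlt _ (by omega)]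

lemma pvRoot_step {p : List Nat} (hmono : ∀ a, p.getD a a ≤ a) (a : Nat) :
    pvRoot p a = if p.getD a a = a then a else pvRoot p (p.getD a a) := by
  by_cases hpa : p.getD a a = a
  · rw [pvRoot, pvFind_succ, if_pos hpa, if_pos hpa]
  · have hlt : p.getD a a < a := lt_of_le_of_ne (hmono a) hpa
    rw [pvRoot, pvFind_succ, if_neg hpa, if_neg hpa]
    exact pvFind_irrel hmono _ _ (by omega)

lemma pvRoot_of_fix {p : List Nat} {a : Nat} (h : p.getD a a = a) : pvRoot p a = a := by
  rw [pvRoot, pvFind_succ, if_pos h]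

lemma pvRoot_le {p : List Nat} (hmono : ∀ a, p.getD a a ≤ a) :
    ∀ a, pvRoot p a ≤ a := by
  intro a
  induction a using Nat.strong_induction_on with
  | _ a ih =>
    rw [pvRoot_step hmono a]
    by_cases hpa : p.getD a a = a
    · rw [if_pos hpa]
    · have hlt := lt_of_le_of_ne (hmono a) hpa
      rw [if_neg hpa]
      exact le_trans (ih _ hlt) (le_of_lt hlt)

lemma pvRoot_isRoot {p : List Nat} (hmono : ∀ a, p.getD a a ≤ a) :
    ∀ a, p.getD (pvRoot p a) (pvRoot p a) = pvRoot p a := by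
  intro a
  induction a using Nat.strong_induction_on with
  | _ a ih =>
    rw [pvRoot_step hmono a]
    by_cases hpa : p.getD a a = a
    · rw [if_pos hpa]
      exact hpa
    · have hlt := lt_of_le_of_ne (hmono a) hpa
      rw [if_neg hpa]
      exact ih _ hlt

lemma pvGetD_set {p : List Nat} {M m : Nat} (hM : M < p.length) (x : Nat) :
    (p.set M m).getD x x = if x = M then m else p.getD x x := by
  rw [List.getD_eq_getElem?_getD, List.getD_eq_getElem?_getD]
  by_cases hx : x = M
  · subst hx
    rw [List.getElem?_set_self hM, if_pos rfl]
    rfl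
  · rw [List.getElem?_set_ne (fun hc => hx hc.symm), if_neg hx]

lemma pvRoot_set {p : List Nat} (hmono : ∀ a, p.getD a a ≤ a) {M m : Nat}
    (hMlen : M < p.length) (hMroot : p.getD M M = M) (hmroot : p.getD m m = m)
    (hmM : m < M) :
    (∀ a, (p.set M m).getD a a ≤ a) ∧
    ∀ x, pvRoot (p.set M m) x = if pvRoot p x = M then m else pvRoot p x := by
  have hmono' : ∀ a, (p.set M m).getD a a ≤ a := by
    intro a
    rw [pvGetD_set hMlen a]
    split
    · omega
    · exact hmono a
  refine ⟨hmono', ?_⟩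
  intro x
  induction x using Nat.strong_induction_on with
  | _ x ih =>
    rw [pvRoot_step hmono' x, pvGetD_set hMlen x]
    by_cases hxM : x = M
    · subst hxM
      rw [if_pos rfl, if_neg (by omega), ih m hmM, pvRoot_of_fix hmroot,
        if_neg (by omega), pvRoot_of_fix hMroot, if_pos rfl]
    · rw [if_neg hxM]
      by_cases hfix : p.getD x x = x
      · rw [if_pos hfix, pvRoot_of_fix hfix, if_neg hxM]
      · have hlt := lt_of_le_of_ne (hmono x) hfix
        rw [if_neg hfix, ih _ hlt]
        conv_rhs => rw [pvRoot_step hmono x, if_neg hfix]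

lemma pvSetRoot_rootEq {p : List Nat} (hmono : ∀ a, p.getD a a ≤ a) {M m : Nat}
    (hMlen : M < p.length) (hMroot : p.getD M M = M) (hmroot : p.getD m m = m)
    (hmM : m < M) (x y : Nat) :
    (pvRoot (p.set M m) x = pvRoot (p.set M m) y) ↔
      (pvRoot p x = pvRoot p y ∨ (pvRoot p x = M ∧ pvRoot p y = m)
        ∨ (pvRoot p x = m ∧ pvRoot p y = M)) := by
  obtain ⟨_, hroot⟩ := pvRoot_set hmono hMlen hMroot hmroot hmM
  rw [hroot x, hroot y]
  by_cases hx : pvRoot p x = M <;> by_cases hy : pvRoot p y = M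
  · rw [if_pos hx, if_pos hy]
    exact iff_of_true rfl (Or.inl (hx.trans hy.symm))
  · rw [if_pos hx, if_neg hy]
    constructor
    · intro hm
      exact Or.inr (Or.inl ⟨hx, hm.symm⟩)
    · rintro (hc | ⟨_, h2⟩ | ⟨h1, h2⟩)
      · exact absurd (hc.symm.trans hx) hy
      · exact h2.symm
      · exact absurd h2 hy
  · rw [if_neg hx, if_pos hy]
    constructor
    · intro hm
      exact Or.inr (Or.inr ⟨hm, hy⟩)
    · rintro (hc | ⟨h1, h2⟩ | ⟨h1, _⟩)
      · exact absurd (hc.trans hy) hx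
      · exact absurd h1 hx
      · exact h1
  · rw [if_neg hx, if_neg hy]
    constructor
    · exact Or.inl
    · rintro (hc | ⟨h1, h2⟩ | ⟨h1, h2⟩)
      · exact hc
      · exact absurd h1 hx
      · exact absurd h2 hy

lemma pvUnionUF_spec {n : Nat} {p : List Nat} (hlen : p.length = n)
    (hmono : ∀ a, p.getD a a ≤ a) {a b : Nat} (ha : a < n) (hb : b < n) :
    (pvUnionUF p a b).length = n ∧ (∀ x, (pvUnionUF p a b).getD x x ≤ x) ∧
    ∀ x y, (pvRoot (pvUnionUF p a b) x = pvRoot (pvUnionUF p a b) y ↔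
      (pvRoot p x = pvRoot p y ∨ (pvRoot p x = pvRoot p a ∧ pvRoot p y = pvRoot p b)
        ∨ (pvRoot p x = pvRoot p b ∧ pvRoot p y = pvRoot p a))) := by
  unfold pvUnionUF
  by_cases hrr : pvRoot p a = pvRoot p b
  · rw [if_pos hrr]
    refine ⟨hlen, hmono, fun x y => ?_⟩
    constructor
    · exact Or.inl
    · rintro (hxy | ⟨h1, h2⟩ | ⟨h1, h2⟩)
      · exact hxy
      · rw [h1, h2, hrr]
      · rw [h1, h2, hrr]
  · rw [if_neg hrr]
    have hraroot := pvRoot_isRoot hmono a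
    have hrbroot := pvRoot_isRoot hmono b
    have hMroot : p.getD (max (pvRoot p a) (pvRoot p b)) (max (pvRoot p a) (pvRoot p b))
        = max (pvRoot p a) (pvRoot p b) := by
      rcases Nat.le_total (pvRoot p a) (pvRoot p b) with hle | hle
    

      · rw [Nat.max_eq_right hle]; exact hrbroot
      · rw [Nat.max_eq_left hle]; exact hraroot
    have hmroot : p.getD (min (pvRoot p a) (pvRoot p b)) (min (pvRoot p a) (pvRoot p b))
        = min (pvRoot p a) (pvRoot p b) := by
      rcases Nat.le_total (pvRoot p a) (pvRoot p b) with hle | hle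
      · rw [Nat.min_eq_left hle]; exact hraroot
      · rw [Nat.min_eq_right hle]; exact hrbroot
    have hMlen : max (pvRoot p a) (pvRoot p b) < p.length := by
      have h1 := pvRoot_le hmono a
      have h2 := pvRoot_le hmono b
      omega
    have hmM : min (pvRoot p a) (pvRoot p b) < max (pvRoot p a) (pvRoot p b) := by
      omega
    obtain ⟨hmono', _⟩ := pvRoot_set hmono hMlen hMroot hmroot hmM
    refine ⟨by simp [hlen], hmono', fun x y => ?_⟩
    rw [pvSetRoot_rootEq hmono hMlen hMroot hmroot hmM x y]
    rcases Nat.le_total (pvRoot p a) (pvRoot p b) with hle | hle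
    · rw [Nat.max_eq_right hle, Nat.min_eq_left hle] <;> tauto
    · rw [Nat.max_eq_left hle, Nat.min_eq_right hle] <;> tauto

lemma pvEqvGen_mono {R S : Nat → Nat → Prop} (h : ∀ u v, R u v → S u v) {x y : Nat}
    (hx : Relation.EqvGen R x y) : Relation.EqvGen S x y := by
  induction hx with
  | rel u v huv => exact Relation.EqvGen.rel u v (h u v huv)
  | refl u => exact Relation.EqvGen.refl u
  | symm u v _ ih => exact ih.symm
  | trans u v w _ _ ih1 ih2 => exact ih1.trans _ _ _ ih2

lemma pvEqvGen_congr {R S : Nat → Nat → Prop} (h : ∀ u v, R u v ↔ S u v) (x y : Nat) :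
    Relation.EqvGen R x y ↔ Relation.EqvGen S x y :=
  ⟨pvEqvGen_mono (fun u v => (h u v).1), pvEqvGen_mono (fun u v => (h u v).2)⟩

lemma pvEqvGen_bot (x y : Nat) : Relation.EqvGen (fun _ _ => False) x y ↔ x = y := by
  constructor
  · intro hx
    induction hx with
    | rel _ _ h => exact h.elim
    | refl => rfl
    | symm _ _ _ ih => exact ih.symm
    | trans _ _ _ _ _ ih1 ih2 => exact ih1.trans ih2
  · rintro rfl
    exact Relation.EqvGen.refl x

lemma pvEqvGen_add (R : Nat → Nat → Prop) (a b x y : Nat) :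
    Relation.EqvGen (fun u v => R u v ∨ (u = a ∧ v = b) ∨ (u = b ∧ v = a)) x y ↔
      (Relation.EqvGen R x y ∨ (Relation.EqvGen R x a ∧ Relation.EqvGen R b y)
        ∨ (Relation.EqvGen R x b ∧ Relation.EqvGen R a y)) := by
  constructor
  · intro hx
    induction hx with
    | rel u v huv =>
      rcases huv with h | ⟨rfl, rfl⟩ | ⟨rfl, rfl⟩
      · exact Or.inl (Relation.EqvGen.rel _ _ h)
      · exact Or.inr (Or.inl ⟨Relation.EqvGen.refl _, Relation.EqvGen.refl _⟩)
      · exact Or.inr (Or.inr ⟨Relation.EqvGen.refl _, Relation.EqvGen.refl _⟩)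
    | refl u => exact Or.inl (Relation.EqvGen.refl u)
    | symm u v _ ih =>
      rcases ih with h | ⟨h1, h2⟩ | ⟨h1, h2⟩
      · exact Or.inl h.symm
      · exact Or.inr (Or.inr ⟨h2.symm, h1.symm⟩)
      · exact Or.inr (Or.inl ⟨h2.symm, h1.symm⟩)
    | trans u v w _ _ ih1 ih2 =>
      rcases ih1 with h | ⟨h1, h2⟩ | ⟨h1, h2⟩ <;> rcases ih2 with g | ⟨g1, g2⟩ | ⟨g1, g2⟩
      · exact Or.inl (h.trans _ _ _ g)
      · exact Or.inr (Or.inl ⟨h.trans _ _ _ g1, g2⟩)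
      · exact Or.inr (Or.inr ⟨h.trans _ _ _ g1, g2⟩)
      · exact Or.inr (Or.inl ⟨h1, h2.trans _ _ _ g⟩)
      · exact Or.inr (Or.inl ⟨h1, g2⟩)
      · exact Or.inl (h1.trans _ _ _ g2)
      · exact Or.inr (Or.inr ⟨h1, h2.trans _ _ _ g⟩)
      · exact Or.inl (h1.trans _ _ _ g2)
      · exact Or.inr (Or.inr ⟨h1, g2⟩)
  · rintro (h | ⟨h1, h2⟩ | ⟨h1, h2⟩)
    · exact pvEqvGen_mono (fun u v hr => Or.inl hr) h
    · refine ((pvEqvGen_mono (fun u v hr => Or.inl hr) h1).trans _ _ _ ?_).trans _ _ _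
        (pvEqvGen_mono (fun u v hr => Or.inl hr) h2)
      exact Relation.EqvGen.rel a b (Or.inr (Or.inl ⟨rfl, rfl⟩))
    · refine ((pvEqvGen_mono (fun u v hr => Or.inl hr) h1).trans _ _ _ ?_).trans _ _ _
        (pvEqvGen_mono (fun u v hr => Or.inl hr) h2)
      exact Relation.EqvGen.rel b a (Or.inr (Or.inr ⟨rfl, rfl⟩))

def pvERel (es : List (Nat × Nat)) (x y : Nat) : Prop := (x, y) ∈ es ∨ (y, x) ∈ es

lemma pvUF_fold (n : Nat) :
    ∀ (es : List (Nat × Nat)) (p : List Nat) (R : Nat → Nat → Prop),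
      (∀ e ∈ es, e.1 < n ∧ e.2 < n) →
      p.length = n → (∀ x, p.getD x x ≤ x) →
      (∀ x y, pvRoot p x = pvRoot p y ↔ Relation.EqvGen R x y) →
      (es.foldl (fun q e => pvUnionUF q e.1 e.2) p).length = n ∧
      (∀ x, (es.foldl (fun q e => pvUnionUF q e.1 e.2) p).getD x x ≤ x) ∧
      (∀ x y, pvRoot (es.foldl (fun q e => pvUnionUF q e.1 e.2) p) x
          = pvRoot (es.foldl (fun q e => pvUnionUF q e.1 e.2) p) y ↔
        Relation.EqvGen (fun u v => R u v ∨ pvERel es u v) x y) := by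
  intro es
  induction es with
  | nil =>
    intro p R hes hlen hmono hinv
    refine ⟨hlen, hmono, fun x y => ?_⟩
    rw [List.foldl_nil, hinv x y]
    exact pvEqvGen_congr (fun u v => by simp [pvERel]) x y
  | cons e es ih =>
    intro p R hes hlen hmono hinv
    obtain ⟨ha, hb⟩ := hes e List.mem_cons_self
    obtain ⟨hlen', hmono', hroot'⟩ := pvUnionUF_spec hlen hmono ha hb
    rw [List.foldl_cons]
    have hinv' : ∀ x y, pvRoot (pvUnionUF p e.1 e.2) x = pvRoot (pvUnionUF p e.1 e.2) y ↔
        Relation.EqvGen (fun u v => R u v ∨ (u = e.1 ∧ v = e.2) ∨ (u = e.2 ∧ v = e.1)) x y := by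
      intro x y
      rw [hroot' x y, pvEqvGen_add R e.1 e.2 x y]
      constructor
      · rintro (h | ⟨h1, h2⟩ | ⟨h1, h2⟩)
        · exact Or.inl ((hinv x y).1 h)
        · exact Or.inr (Or.inl ⟨(hinv x e.1).1 h1, ((hinv y e.2).1 h2).symm⟩)
        · exact Or.inr (Or.inr ⟨(hinv x e.2).1 h1, ((hinv y e.1).1 h2).symm⟩)
      · rintro (h | ⟨h1, h2⟩ | ⟨h1, h2⟩)
        · exact Or.inl ((hinv x y).2 h)
        · exact Or.inr (Or.inl ⟨(hinv x e.1).2 h1, (hinv y e.2).2 h2.symm⟩)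
        · exact Or.inr (Or.inr ⟨(hinv x e.2).2 h1, (hinv y e.1).2 h2.symm⟩)
    obtain ⟨c1, c2, c3⟩ := ih (pvUnionUF p e.1 e.2) _
      (fun e' he' => hes e' (List.mem_cons_of_mem _ he')) hlen' hmono' hinv'
    refine ⟨c1, c2, fun x y => (c3 x y).trans (pvEqvGen_congr (fun u v => ?_) x y)⟩
    unfold pvERel
    simp only [List.mem_cons]
    constructor
    · rintro ((h | ⟨h1, h2⟩ | ⟨h1, h2⟩) | (h | h))
      · exact Or.inl h
      · exact Or.inr (Or.inl (Or.inl (by rw [h1, h2])))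
      · exact Or.inr (Or.inr (Or.inl (by rw [h1, h2])))
      · exact Or.inr (Or.inl (Or.inr h))
      · exact Or.inr (Or.inr (Or.inr h))
    · rintro (h | (h | h) | (h | h))
      · exact Or.inl (Or.inl h)
      · exact Or.inl (Or.inr (Or.inl ⟨congrArg Prod.fst h, congrArg Prod.snd h⟩))
      · exact Or.inr (Or.inl h)
      · exact Or.inl (Or.inr (Or.inr ⟨congrArg Prod.snd h, congrArg Prod.fst h⟩))
      · exact Or.inr (Or.inr h)

-- ===== geometry: grid edges, adjacency on Nat cells, and the index encoding =====

def pvInbN (base : List (List Char)) (w h : Nat) (c : Nat × Nat) : Prop :=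
  c.1 < w ∧ c.2 < h ∧ pvCell base ((c.1 : Nat) : Int) ((c.2 : Nat) : Int) = some '.'

def pvAdjN (base : List (List Char)) (w h : Nat) (c d : Nat × Nat) : Prop :=
  pvInbN base w h c ∧ pvInbN base w h d ∧
    ((d.1 = c.1 + 1 ∧ d.2 = c.2) ∨ (c.1 = d.1 + 1 ∧ d.2 = c.2) ∨
     (d.2 = c.2 + 1 ∧ d.1 = c.1) ∨ (c.2 = d.2 + 1 ∧ d.1 = c.1))

def pvEdges (base : List (List Char)) (w h : Nat) (i j : Nat) : List (Nat × Nat) :=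
  if pvCell base ((i : Nat) : Int) ((j : Nat) : Int) = some '.' then
    (if i + 1 < w ∧ pvCell base (((i + 1 : Nat)) : Int) ((j : Nat) : Int) = some '.'
      then [(i * h + j, (i + 1) * h + j)] else []) ++
    (if j + 1 < h ∧ pvCell base ((i : Nat) : Int) (((j + 1 : Nat)) : Int) = some '.'
      then [(i * h + j, i * h + j + 1)] else [])
  else []

def pvAllEdges (base : List (List Char)) (w h : Nat) : List (Nat × Nat) :=
  (List.range w).flatMap (fun i => (List.range h).flatMap (fun j => pvEdges base w h i j))

lemma pvFoldl_flatMap {α β γ : Type} (f : α → List β) (g : γ → β → γ) :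
    ∀ (l : List α) (init : γ),
      (l.flatMap f).foldl g init = l.foldl (fun acc a => (f a).foldl g acc) init := by
  intro l
  induction l with
  | nil => intro init; rfl
  | cons a t ih => intro init; simp only [List.flatMap_cons, List.foldl_append, List.foldl_cons, ih]

lemma pvMem_ite_single {α : Type} {c : Prop} [Decidable c] {x e : α} :
    e ∈ (if c then [x] else []) ↔ c ∧ e = x := by
  split_ifs with hc <;> simp [hc]

lemma pvMem_allEdges {base : List (List Char)} {w h : Nat} {e : Nat × Nat} :
    e ∈ pvAllEdges base w h ↔ ∃ i j, i < w ∧ j < h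
      ∧ pvCell base ((i : Nat) : Int) ((j : Nat) : Int) = some '.'
      ∧ ((i + 1 < w ∧ pvCell base (((i + 1 : Nat)) : Int) ((j : Nat) : Int) = some '.'
            ∧ e = (i * h + j, (i + 1) * h + j))
        ∨ (j + 1 < h ∧ pvCell base ((i : Nat) : Int) (((j + 1 : Nat)) : Int) = some '.'
            ∧ e = (i * h + j, i * h + j + 1))) := by
  unfold pvAllEdges
  simp only [List.mem_flatMap, List.mem_range]
  constructor
  · rintro ⟨i, hi, j, hj, hmem⟩
    unfold pvEdges at hmem
    by_cases hdot : pvCell base ((i : Nat) : Int) ((j : Nat) : Int) = some '.'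
    · rw [if_pos hdot, List.mem_append, pvMem_ite_single, pvMem_ite_single] at hmem
      rcases hmem with ⟨⟨h1, h2⟩, h3⟩ | ⟨⟨h1, h2⟩, h3⟩
      · exact ⟨i, j, hi, hj, hdot, Or.inl ⟨h1, h2, h3⟩⟩
      · exact ⟨i, j, hi, hj, hdot, Or.inr ⟨h1, h2, h3⟩⟩
    · rw [if_neg hdot] at hmem
      exact absurd hmem (List.not_mem_nil)
  · rintro ⟨i, j, hi, hj, hdot, hcase⟩
    refine ⟨i, hi, j, hj, ?_⟩
    unfold pvEdges
    rw [if_pos hdot, List.mem_append, pvMem_ite_single, pvMem_ite_single]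
    rcases hcase with ⟨h1, h2, h3⟩ | ⟨h1, h2, h3⟩
    · exact Or.inl ⟨⟨h1, h2⟩, h3⟩
    · exact Or.inr ⟨⟨h1, h2⟩, h3⟩

lemma pvIdx_lt {w h i j : Nat} (hi : i < w) (hj : j < h) : i * h + j < w * h := by
  calc i * h + j < i * h + h := by omega
    _ = (i + 1) * h := by ring
    _ ≤ w * h := Nat.mul_le_mul_right h hi

lemma pvIdx_inj {h i j i' j' : Nat} (hj : j < h) (hj' : j' < h)
    (he : i * h + j = i' * h + j') : i = i' ∧ j = j' := by
  have h0 : 0 < h := by omega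
  have e1 : (i * h + j) / h = i := by
    rw [Nat.mul_comm i h, Nat.mul_add_div h0, Nat.div_eq_of_lt hj]
    omega
  have e2 : (i' * h + j') / h = i' := by
    rw [Nat.mul_comm i' h, Nat.mul_add_div h0, Nat.div_eq_of_lt hj']
    omega
  have e3 : i = i' := by rw [← e1, ← e2, he]
  constructor
  · exact e3
  · subst e3
    omega

lemma pvAdjN_symm {base : List (List Char)} {w h : Nat} {c d : Nat × Nat}
    (hadj : pvAdjN base w h c d) : pvAdjN base w h d c := by
  obtain ⟨h1, h2, h3⟩ := hadj
  exact ⟨h2, h1, by tauto⟩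

lemma pvConnN_symm {base : List (List Char)} {w h : Nat} {c d : Nat × Nat}
    (hc : Relation.ReflTransGen (pvAdjN base w h) c d) :
    Relation.ReflTransGen (pvAdjN base w h) d c :=
  Relation.ReflTransGen.symmetric (fun _ _ => pvAdjN_symm) hc

lemma pvAdjN_to_rel {base : List (List Char)} {w h : Nat} {c d : Nat × Nat}
    (hadj : pvAdjN base w h c d) :
    pvERel (pvAllEdges base w h) (c.1 * h + c.2) (d.1 * h + d.2) := by
  obtain ⟨⟨hc1, hc2, hcdot⟩, ⟨hd1, hd2, hddot⟩, hdir⟩ := hadj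
  obtain ⟨c1, c2⟩ := c
  obtain ⟨d1, d2⟩ := d
  simp only at hc1 hc2 hcdot hd1 hd2 hddot hdir ⊢
  rcases hdir with ⟨e1, e2⟩ | ⟨e1, e2⟩ | ⟨e1, e2⟩ | ⟨e1, e2⟩
  · rw [e1, e2] at hddot
    rw [e1] at hd1
    exact Or.inl (pvMem_allEdges.2 ⟨c1, c2, hc1, hc2, hcdot,
      Or.inl ⟨hd1, hddot, by rw [e1, e2]⟩⟩)
  · rw [e1, ← e2] at hcdot
    rw [e1] at hc1
    exact Or.inr (pvMem_allEdges.2 ⟨d1, d2, hd1, hd2, hddot,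
      Or.inl ⟨hc1, hcdot, by rw [e1, ← e2]⟩⟩)
  · rw [e2, e1] at hddot
    rw [e1] at hd2
    exact Or.inl (pvMem_allEdges.2 ⟨c1, c2, hc1, hc2, hcdot,
      Or.inr ⟨hd2, hddot, by rw [e2, e1, ← Nat.add_assoc]⟩⟩)
  · rw [← e2, e1] at hcdot
    rw [e1] at hc2
    exact Or.inr (pvMem_allEdges.2 ⟨d1, d2, hd1, hd2, hddot,
      Or.inr ⟨hc2, hcdot, by rw [← e2, e1, ← Nat.add_assoc]⟩⟩)

lemma pvRel_decode {base : List (List Char)} {w h : Nat} {x y : Nat}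
    (hr : pvERel (pvAllEdges base w h) x y) :
    ∃ c d, pvAdjN base w h c d ∧ x = c.1 * h + c.2 ∧ y = d.1 * h + d.2 := by
  rcases hr with hm | hm
  · obtain ⟨i, j, hi, hj, hdot, hcase⟩ := pvMem_allEdges.1 hm
    rcases hcase with ⟨h1, h2, h3⟩ | ⟨h1, h2, h3⟩
    · refine ⟨(i, j), (i + 1, j), ⟨⟨hi, hj, hdot⟩, ⟨h1, hj, h2⟩, Or.inl ⟨rfl, rfl⟩⟩, ?_, ?_⟩
      · simpa using congrArg Prod.fst h3
      · simpa using congrArg Prod.snd h3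
    · refine ⟨(i, j), (i, j + 1), ⟨⟨hi, hj, hdot⟩, ⟨hi, h1, h2⟩,
        Or.inr (Or.inr (Or.inl ⟨rfl, rfl⟩))⟩, ?_, ?_⟩
      · simpa using congrArg Prod.fst h3
      · simpa [Nat.add_assoc] using congrArg Prod.snd h3
  · obtain ⟨i, j, hi, hj, hdot, hcase⟩ := pvMem_allEdges.1 hm
    rcases hcase with ⟨h1, h2, h3⟩ | ⟨h1, h2, h3⟩
    · refine ⟨(i + 1, j), (i, j), ⟨⟨h1, hj, h2⟩, ⟨hi, hj, hdot⟩,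
        Or.inr (Or.inl ⟨rfl, rfl⟩)⟩, ?_, ?_⟩
      · simpa using congrArg Prod.snd h3
      · simpa using congrArg Prod.fst h3
    · refine ⟨(i, j + 1), (i, j), ⟨⟨hi, h1, h2⟩, ⟨hi, hj, hdot⟩,
        Or.inr (Or.inr (Or.inr ⟨rfl, rfl⟩))⟩, ?_, ?_⟩
      · simpa [Nat.add_assoc] using congrArg Prod.snd h3
      · simpa using congrArg Prod.fst h3

lemma pvEqv_decode {base : List (List Char)} {w h : Nat} {x y : Nat}
    (he : Relation.EqvGen (pvERel (pvAllEdges base w h)) x y) :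
    x = y ∨ ∃ c d, pvInbN base w h c ∧ pvInbN base w h d ∧ x = c.1 * h + c.2
      ∧ y = d.1 * h + d.2 ∧ Relation.ReflTransGen (pvAdjN base w h) c d := by
  induction he with
  | rel u v huv =>
    obtain ⟨c, d, hadj, rfl, rfl⟩ := pvRel_decode huv
    exact Or.inr ⟨c, d, hadj.1, hadj.2.1, rfl, rfl, Relation.ReflTransGen.single hadj⟩
  | refl u => exact Or.inl rfl
  | symm u v _ ih =>
    rcases ih with h | ⟨c, d, h1, h2, h3, h4, h5⟩
    · exact Or.inl h.symm
    · exact Or.inr ⟨d, c, h2, h1, h4, h3, pvConnN_symm h5⟩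
  | trans u v w' _ _ ih1 ih2 =>
    rcases ih1 with h | ⟨c, d, h1, h2, h3, h4, h5⟩
    · rcases ih2 with g | ⟨c', d', g1, g2, g3, g4, g5⟩
      · exact Or.inl (h.trans g)
      · exact Or.inr ⟨c', d', g1, g2, h.trans g3, g4, g5⟩
    · rcases ih2 with g | ⟨c', d', g1, g2, g3, g4, g5⟩
      · exact Or.inr ⟨c, d, h1, h2, h3, g ▸ h4, h5⟩
      · -- v = idx d = idx c'; decode the middle point
        obtain ⟨e1, e2⟩ := pvIdx_inj h2.2.1 g1.2.1 (h4.symm.trans g3)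
        have hdc : d = c' := Prod.ext_iff.2 ⟨e1, e2⟩
        exact Or.inr ⟨c, d', h1, g2, h3, g4, h5.trans (hdc ▸ g5)⟩

lemma pvConn_encode {base : List (List Char)} {w h : Nat} {c d : Nat × Nat}
    (hc : Relation.ReflTransGen (pvAdjN base w h) c d) :
    Relation.EqvGen (pvERel (pvAllEdges base w h)) (c.1 * h + c.2) (d.1 * h + d.2) := by
  induction hc with
  | refl => exact Relation.EqvGen.refl _
  | tail _ hstep ih =>
    exact ih.trans _ _ _ (Relation.EqvGen.rel _ _ (pvAdjN_to_rel hstep))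

-- bridging Nat-cell adjacency with the Int-level step relation of the closure
lemma pvAdj_of_rel {base : List (List Char)} {w h : Nat} {c : Nat × Nat} {q : Int × Int}
    (hcin : pvInbN base w h c)
    (hr : pvRel base w h (∅ : Finset (Int × Int)) (((c.1 : Nat) : Int), ((c.2 : Nat) : Int)) q) :
    ∃ d : Nat × Nat, q = (((d.1 : Nat) : Int), ((d.2 : Nat) : Int)) ∧ pvAdjN base w h c d := by
  obtain ⟨hn, hinb, hdot, _⟩ := hr
  obtain ⟨h1, h2, h3, h4⟩ := hinb
  refine ⟨(q.1.toNat, q.2.toNat), ?_, ?_⟩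
  · obtain ⟨q1, q2⟩ := q
    simp only [Prod.ext_iff] at *
    constructor <;> simp <;> omega
  · have hq1 : q.1.toNat < w := by omega
    have hq2 : q.2.toNat < h := by omega
    have hqdot : pvCell base ((q.1.toNat : Nat) : Int) ((q.2.toNat : Nat) : Int) = some '.' := by
      have e1 : ((q.1.toNat : Nat) : Int) = q.1 := by omega
      have e2 : ((q.2.toNat : Nat) : Int) = q.2 := by omega
      rw [e1, e2]; exact hdot
    refine ⟨hcin, ⟨hq1, hq2, hqdot⟩, ?_⟩
    simp only [pvNbrs4, List.mem_cons, List.not_mem_nil, or_false, Prod.ext_iff] at hn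
    rcases hn with ⟨e1, e2⟩ | ⟨e1, e2⟩ | ⟨e1, e2⟩ | ⟨e1, e2⟩
    · exact Or.inr (Or.inr (Or.inr ⟨by omega, by omega⟩))
    · exact Or.inr (Or.inr (Or.inl ⟨by omega, by omega⟩))
    · exact Or.inr (Or.inl ⟨by omega, by omega⟩)
    · exact Or.inl ⟨by omega, by omega⟩

lemma pvRel_of_adj {base : List (List Char)} {w h : Nat} {c d : Nat × Nat}
    (hadj : pvAdjN base w h c d) :
    pvRel base w h (∅ : Finset (Int × Int)) (((c.1 : Nat) : Int), ((c.2 : Nat) : Int))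
      (((d.1 : Nat) : Int), ((d.2 : Nat) : Int)) := by
  obtain ⟨⟨hc1, hc2, hcdot⟩, ⟨hd1, hd2, hddot⟩, hdir⟩ := hadj
  refine ⟨?_, ⟨by positivity, ?_, by positivity, ?_⟩, hddot, Finset.notMem_empty _⟩
  case refine_2 =>
    show ((d.1 : Nat) : Int) < ((w : Nat) : Int)
    exact_mod_cast hd1
  case refine_3 =>
    show ((d.2 : Nat) : Int) < ((h : Nat) : Int)
    exact_mod_cast hd2
  simp only [pvNbrs4, List.mem_cons, List.not_mem_nil, or_false, Prod.ext_iff]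
  rcases hdir with ⟨e1, e2⟩ | ⟨e1, e2⟩ | ⟨e1, e2⟩ | ⟨e1, e2⟩
  · exact Or.inr (Or.inr (Or.inr ⟨by omega, by omega⟩))
  · exact Or.inr (Or.inr (Or.inl ⟨by omega, by omega⟩))
  · exact Or.inr (Or.inl ⟨by omega, by omega⟩)
  · exact Or.inl ⟨by omega, by omega⟩

lemma pvRTG_to_N {base : List (List Char)} {w h : Nat} {c : Nat × Nat} {p : Int × Int}
    (hcin : pvInbN base w h c)
    (hr : Relation.ReflTransGen (pvRel base w h (∅ : Finset (Int × Int)))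
      (((c.1 : Nat) : Int), ((c.2 : Nat) : Int)) p) :
    ∃ d : Nat × Nat, pvInbN base w h d ∧ p = (((d.1 : Nat) : Int), ((d.2 : Nat) : Int)) ∧
      Relation.ReflTransGen (pvAdjN base w h) c d := by
  induction hr with
  | refl => exact ⟨c, hcin, rfl, Relation.ReflTransGen.refl⟩
  | tail _ hstep ih =>
    obtain ⟨d, hdin, rfl, hconn⟩ := ih
    obtain ⟨d', rfl, hadj⟩ := pvAdj_of_rel hdin hstep
    exact ⟨d', hadj.2.1, rfl, hconn.tail hadj⟩

lemma pvRTG_of_N {base : List (List Char)} {w h : Nat} {c d : Nat × Nat}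
    (hc : Relation.ReflTransGen (pvAdjN base w h) c d) :
    Relation.ReflTransGen (pvRel base w h (∅ : Finset (Int × Int)))
      (((c.1 : Nat) : Int), ((c.2 : Nat) : Int)) (((d.1 : Nat) : Int), ((d.2 : Nat) : Int)) := by
  induction hc with
  | refl => exact Relation.ReflTransGen.refl
  | tail _ hstep ih => exact ih.tail (pvRel_of_adj hstep)

-- ===== characterising A's dilation pass =====

abbrev pvProcessed (i j : Int) (q : Int × Int) : Prop := q.1 < i ∨ (q.1 = i ∧ q.2 < j)

abbrev pvHasXNbr (rmc : List (List Char)) (w h : Nat) (i j : Int) (p : Int × Int) : Prop :=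
  ∃ d ∈ pvOffs9, pvInb w h (p.1 + d.1, p.2 + d.2) ∧
    pvCell rmc (p.1 + d.1) (p.2 + d.2) = some 'X' ∧ pvProcessed i j (p.1 + d.1, p.2 + d.2)

def pvDChar (rmc : List (List Char)) (w h : Nat) (i j : Int) (p : Int × Int) : Char :=
  if pvCell rmc p.1 p.2 = some 'X' ∧ pvProcessed i j p then 'X'
  else if pvCell rmc p.1 p.2 = some '.' ∧ pvHasXNbr rmc w h i j p then 'S'
  else '.'

lemma pvProcessed_succ (i j : Int) (q : Int × Int) :
    pvProcessed i (j + 1) q ↔ pvProcessed i j q ∨ q = (i, j) := by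
  simp [pvProcessed, Prod.ext_iff]
  omega

lemma pvDChar_succ_notX (rmc : List (List Char)) (w h : Nat) {i j : Int}
    (hnx : ¬ pvCell rmc i j = some 'X') (p : Int × Int) :
    pvDChar rmc w h i (j + 1) p = pvDChar rmc w h i j p := by
  unfold pvDChar
  refine if_congr ?_ rfl (if_congr ?_ rfl rfl)
  · constructor
    · rintro ⟨h1, h2⟩
      rcases (pvProcessed_succ i j p).1 h2 with h3 | rfl
      · exact ⟨h1, h3⟩
      · exact absurd h1 hnx
    · rintro ⟨h1, h2⟩
      exact ⟨h1, (pvProcessed_succ i j p).2 (Or.inl h2)⟩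
  · refine and_congr Iff.rfl ?_
    unfold pvHasXNbr
    constructor
    · rintro ⟨d, hd, hinb, hX, hpr⟩
      rcases (pvProcessed_succ i j _).1 hpr with h3 | heq
      · exact ⟨d, hd, hinb, hX, h3⟩
      · rw [Prod.mk.injEq] at heq
        rw [heq.1, heq.2] at hX
        exact absurd hX hnx
    · rintro ⟨d, hd, hinb, hX, hpr⟩
      exact ⟨d, hd, hinb, hX, (pvProcessed_succ i j _).2 (Or.inl hpr)⟩

lemma pvDChar_row_end (rmc : List (List Char)) (w h : Nat) (i : Int) {p : Int × Int}
    (hp : pvInb w h p) : pvDChar rmc w h i (h : Int) p = pvDChar rmc w h (i + 1) 0 p := by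
  have hpr : ∀ q : Int × Int, pvInb w h q → (pvProcessed i (h : Int) q ↔ pvProcessed (i + 1) 0 q) := by
    intro q hq
    obtain ⟨h1, h2, h3, h4⟩ := hq
    simp [pvProcessed]
    omega
  unfold pvDChar
  refine if_congr (and_congr Iff.rfl (hpr p hp)) rfl (if_congr (and_congr Iff.rfl ?_) rfl rfl)
  unfold pvHasXNbr
  constructor
  · rintro ⟨d, hd, hinb, hX, hprq⟩
    exact ⟨d, hd, hinb, hX, (hpr _ hinb).1 hprq⟩
  · rintro ⟨d, hd, hinb, hX, hprq⟩
    exact ⟨d, hd, hinb, hX, (hpr _ hinb).2 hprq⟩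

lemma pvOffs9_symm (a b : Int × Int) :
    (∃ d ∈ pvOffs9, (a.1 + d.1, a.2 + d.2) = b) ↔ (∃ d ∈ pvOffs9, (b.1 + d.1, b.2 + d.2) = a) := by
  obtain ⟨a1, a2⟩ := a
  obtain ⟨b1, b2⟩ := b
  constructor <;> rintro ⟨d, hd, heq⟩ <;>
    · rw [Prod.mk.injEq] at heq
      obtain ⟨e1, e2⟩ := heq
      refine ⟨(-d.1, -d.2), by fin_cases hd <;> decide, ?_⟩
      rw [Prod.mk.injEq]
      exact ⟨by omega, by omega⟩

lemma pvHasXNbr_succ (rmc : List (List Char)) (w h : Nat) {i j : Int}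
    (hX : pvCell rmc i j = some 'X') (hij : pvInb w h (i, j)) (p : Int × Int) :
    pvHasXNbr rmc w h i (j + 1) p
      ↔ pvHasXNbr rmc w h i j p ∨ (∃ d ∈ pvOffs9, (p.1 + d.1, p.2 + d.2) = (i, j)) := by
  unfold pvHasXNbr
  constructor
  · rintro ⟨d, hd, hinb, hXq, hpr⟩
    rcases (pvProcessed_succ i j _).1 hpr with h3 | heq
    · exact Or.inl ⟨d, hd, hinb, hXq, h3⟩
    · exact Or.inr ⟨d, hd, heq⟩
  · rintro (⟨d, hd, hinb, hXq, hpr⟩ | ⟨d, hd, heq⟩)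
    · exact ⟨d, hd, hinb, hXq, (pvProcessed_succ i j _).2 (Or.inl hpr)⟩
    · rw [Prod.mk.injEq] at heq
      obtain ⟨e1, e2⟩ := heq
      refine ⟨d, hd, ?_, ?_, ?_⟩
      · rw [show (p.1 + d.1, p.2 + d.2) = (i, j) from by rw [e1, e2]]
        exact hij
      · rw [e1, e2]
        exact hX
      · rw [show (p.1 + d.1, p.2 + d.2) = (i, j) from by rw [e1, e2]]
        exact (pvProcessed_succ i j _).2 (Or.inr rfl)

lemma pvRange_m1_2 : PySem.List.pyRange (-1) 2 1 = [-1, 0, 1] := by decide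

lemma pvCell_setS_fold (rmc : List (List Char)) (w h : Nat) (i j : Int) (ds : List (Int × Int)) :
    ∀ (g : List (List Char)), pvShape w h g →
      pvShape w h (ds.foldl (fun mm d =>
        if 0 ≤ i + d.1 ∧ i + d.1 < (w : Int) ∧ 0 ≤ j + d.2 ∧ j + d.2 < (h : Int)
            ∧ pvCell rmc (i + d.1) (j + d.2) = some '.'
        then pvSet2 mm (i + d.1) (j + d.2) 'S' else mm) g) ∧
      ∀ a b : Int, 0 ≤ a → 0 ≤ b →
        pvCell (ds.foldl (fun mm d =>
          if 0 ≤ i + d.1 ∧ i + d.1 < (w : Int) ∧ 0 ≤ j + d.2 ∧ j + d.2 < (h : Int)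
              ∧ pvCell rmc (i + d.1) (j + d.2) = some '.'
          then pvSet2 mm (i + d.1) (j + d.2) 'S' else mm) g) a b
          = if (∃ d ∈ ds, i + d.1 = a ∧ j + d.2 = b ∧ pvInb w h (a, b) ∧ pvCell rmc a b = some '.')
            then some 'S' else pvCell g a b := by
  induction ds with
  | nil =>
    intro g hg
    refine ⟨hg, fun a b _ _ => ?_⟩
    simp
  | cons d ds ih =>
    intro g hg
    simp only [List.foldl_cons]
    by_cases hgd : 0 ≤ i + d.1 ∧ i + d.1 < (w : Int) ∧ 0 ≤ j + d.2 ∧ j + d.2 < (h : Int)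
        ∧ pvCell rmc (i + d.1) (j + d.2) = some '.'
    · rw [if_pos hgd]
      have hinb : pvInb w h (i + d.1, j + d.2) := ⟨hgd.1, hgd.2.1, hgd.2.2.1, hgd.2.2.2.1⟩
      obtain ⟨hsh', hcell'⟩ := ih (pvSet2 g (i + d.1) (j + d.2) 'S') (pvShape_set2 hg hinb 'S')
      refine ⟨hsh', fun a b ha hb => ?_⟩
      rw [hcell' a b ha hb, pvCell_set2 hg hinb 'S' ha hb]
      by_cases hds : ∃ d' ∈ ds, i + d'.1 = a ∧ j + d'.2 = b ∧ pvInb w h (a, b) ∧ pvCell rmc a b = some '.'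
      · rw [if_pos hds, if_pos ⟨_, List.mem_cons_of_mem d (by exact hds.choose_spec.1), hds.choose_spec.2⟩]
      · rw [if_neg hds]
        by_cases hd0 : a = i + d.1 ∧ b = j + d.2
        · rw [if_pos hd0, if_pos ⟨d, List.mem_cons_self, hd0.1.symm, hd0.2.symm, by
            rw [show ((a : Int), (b : Int)) = (i + d.1, j + d.2) from by rw [hd0.1, hd0.2]]
            exact hinb, by rw [hd0.1, hd0.2]; exact hgd.2.2.2.2⟩]
        · rw [if_neg hd0, if_neg ?_]
          rintro ⟨d', hd', he1, he2, hinb', hdot'⟩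
          rcases List.mem_cons.1 hd' with rfl | hmem
          · exact hd0 ⟨he1.symm, he2.symm⟩
          · exact hds ⟨d', hmem, he1, he2, hinb', hdot'⟩
    · rw [if_neg hgd]
      obtain ⟨hsh', hcell'⟩ := ih g hg
      refine ⟨hsh', fun a b ha hb => ?_⟩
      rw [hcell' a b ha hb]
      by_cases hds : ∃ d' ∈ ds, i + d'.1 = a ∧ j + d'.2 = b ∧ pvInb w h (a, b) ∧ pvCell rmc a b = some '.'
      · rw [if_pos hds, if_pos ⟨_, List.mem_cons_of_mem d hds.choose_spec.1, hds.choose_spec.2⟩]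
      · rw [if_neg hds, if_neg ?_]
        rintro ⟨d', hd', he1, he2, hinb', hdot'⟩
        rcases List.mem_cons.1 hd' with rfl | hmem
        · refine hgd ?_
          rw [he1, he2]
          exact ⟨hinb'.1, hinb'.2.1, hinb'.2.2.1, hinb'.2.2.2, hdot'⟩
        · exact hds ⟨d', hmem, he1, he2, hinb', hdot'⟩

lemma pvDChar_succ (rmc : List (List Char)) (w h : Nat) {i j : Int} (hij : pvInb w h (i, j))
    {cij : Char} (hcij : pvCell rmc i j = some cij) (p : Int × Int) :
    pvDChar rmc w h i (j + 1) p =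
      if p = (i, j) ∧ cij = 'X' then 'X'
      else if pvCell rmc p.1 p.2 = some '.' ∧ cij = 'X'
          ∧ (∃ d ∈ pvOffs9, (p.1 + d.1, p.2 + d.2) = (i, j)) then 'S'
      else pvDChar rmc w h i j p := by
  by_cases hX : cij = 'X'
  · subst hX
    by_cases hp : p = (i, j)
    · subst hp
      rw [if_pos ⟨rfl, rfl⟩]
      unfold pvDChar
      rw [if_pos ⟨hcij, (pvProcessed_succ i j _).2 (Or.inr rfl)⟩]
    · rw [if_neg (fun hc => hp hc.1)]
      by_cases hs : pvCell rmc p.1 p.2 = some '.' ∧ (∃ d ∈ pvOffs9, (p.1 + d.1, p.2 + d.2) = (i, j))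
      · rw [if_pos ⟨hs.1, rfl, hs.2⟩]
        unfold pvDChar
        rw [if_neg (fun hc => by rw [hs.1] at hc; exact absurd (Option.some.inj hc.1) (by decide)),
          if_pos ⟨hs.1, (pvHasXNbr_succ rmc w h hcij hij p).2 (Or.inr hs.2)⟩]
      · rw [if_neg (fun hc => hs ⟨hc.1, hc.2.2⟩)]
        unfold pvDChar
        refine if_congr ?_ rfl (if_congr ?_ rfl rfl)
        · refine and_congr Iff.rfl ?_
          rw [pvProcessed_succ]
          constructor
          · rintro (h1 | h2)
            · exact h1
            · exact absurd h2 hp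
          · exact Or.inl
        · refine and_congr_right fun hdot => ?_
          rw [pvHasXNbr_succ rmc w h hcij hij p]
          constructor
          · rintro (h1 | h2)
            · exact h1
            · exact absurd ⟨hdot, h2⟩ hs
          · exact Or.inl
  · rw [if_neg (fun hc => hX hc.2), if_neg (fun hc => hX hc.2.1)]
    refine pvDChar_succ_notX rmc w h (fun hc => hX (Option.some.inj (hcij ▸ hc))) p

def pvSeedsRow (rmc : List (List Char)) (i jend : Nat) : List (Int × Int) :=
  ((List.range jend).filter (fun j => pvCell rmc (i : Int) ((j : Nat) : Int) = some 'D')).map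
    (fun j => ((i : Int), ((j : Nat) : Int)))

def pvSeedsUpto (rmc : List (List Char)) (h : Nat) (i j : Nat) : List (Int × Int) :=
  ((List.range i).flatMap (fun a => pvSeedsRow rmc a h)) ++ pvSeedsRow rmc i j

lemma pvSeedsRow_succ (rmc : List (List Char)) (i j : Nat) :
    pvSeedsRow rmc i (j + 1) = pvSeedsRow rmc i j
      ++ (if pvCell rmc (i : Int) (j : Int) = some 'D' then [((i : Int), (j : Int))] else []) := by
  unfold pvSeedsRow
  rw [List.range_succ, List.filter_append, List.map_append]
  congr 1
  by_cases hD : pvCell rmc (i : Int) (j : Int) = some 'D' <;> simp [hD]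

lemma pvSeedsUpto_succ_col (rmc : List (List Char)) (h : Nat) (i j : Nat) :
    pvSeedsUpto rmc h i (j + 1) = pvSeedsUpto rmc h i j
      ++ (if pvCell rmc (i : Int) (j : Int) = some 'D' then [((i : Int), (j : Int))] else []) := by
  unfold pvSeedsUpto
  rw [pvSeedsRow_succ, List.append_assoc]

lemma pvSeedsUpto_row_end (rmc : List (List Char)) (h : Nat) (i : Nat) :
    pvSeedsUpto rmc h i h = pvSeedsUpto rmc h (i + 1) 0 := by
  unfold pvSeedsUpto
  rw [List.range_succ, List.flatMap_append]
  simp [pvSeedsRow]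

lemma pvNineFold (rmc : List (List Char)) (w h : Nat) (i j : Int) (g0 : List (List Char)) :
    (PySem.List.pyRange (-1) 2 1).foldl (fun mm dx =>
      (PySem.List.pyRange (-1) 2 1).foldl (fun mm2 dy =>
        if 0 ≤ i + dx ∧ i + dx < (w : Int) ∧ 0 ≤ j + dy ∧ j + dy < (h : Int)
            ∧ pvCell rmc (i + dx) (j + dy) = some '.'
        then pvSet2 mm2 (i + dx) (j + dy) 'S' else mm2) mm) g0
    = pvOffs9.foldl (fun mm d =>
        if 0 ≤ i + d.1 ∧ i + d.1 < (w : Int) ∧ 0 ≤ j + d.2 ∧ j + d.2 < (h : Int)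
            ∧ pvCell rmc (i + d.1) (j + d.2) = some '.'
        then pvSet2 mm (i + d.1) (j + d.2) 'S' else mm) g0 := by
  rw [pvRange_m1_2]
  rfl

lemma pvDilInner (rmc : List (List Char)) (w h : Nat)
    (iN : Nat) (hiW : iN < w) :
    ∀ (xs : List Char) (s : Nat) (q : List (Int × Int)) (m : List (List Char)),
      (∀ (k : Nat), k < xs.length → pvCell rmc (iN : Int) ((s + k : Nat) : Int)
        = xs[k]?.map (fun c => c)) →
      s + xs.length = h →
      pvShape w h m →
      (∀ p, pvInb w h p → pvCell m p.1 p.2 = some (pvDChar rmc w h (iN : Int) ((s : Nat) : Int) p)) →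
      q = pvSeedsUpto rmc h iN s →
      ∀ r, r = (PySem.List.enumerate xs ((s : Nat) : Int)).foldl (fun st2 jy =>
          if jy.2 = 'D' then (st2.1 ++ [((iN : Int), jy.1)], st2.2)
          else if jy.2 = 'X' then
            (st2.1, (PySem.List.pyRange (-1) 2 1).foldl (fun mm dx =>
              (PySem.List.pyRange (-1) 2 1).foldl (fun mm2 dy =>
                  if 0 ≤ (iN : Int) + dx ∧ (iN : Int) + dx < (w : Int) ∧ 0 ≤ jy.1 + dy
                      ∧ jy.1 + dy < (h : Int) ∧ pvCell rmc ((iN : Int) + dx) (jy.1 + dy) = some '.'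
                  then pvSet2 mm2 ((iN : Int) + dx) (jy.1 + dy) 'S' else mm2) mm)
              (pvSet2 st2.2 (iN : Int) jy.1 'X'))
          else st2) (q, m) →
      pvShape w h r.2 ∧
      (∀ p, pvInb w h p →
        pvCell r.2 p.1 p.2 = some (pvDChar rmc w h (iN : Int) ((s + xs.length : Nat) : Int) p)) ∧
      r.1 = pvSeedsUpto rmc h iN (s + xs.length) := by
  intro xs
  induction xs with
  | nil =>
    intro s q m hxs hend hsh hinv hq r hr
    rw [PySem.List.enumerate_nil, List.foldl_nil] at hr
    subst hr
    exact ⟨hsh, by simpa using hinv, by simpa using hq⟩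
  | cons y ys ih =>
    intro s q m hxs hend hsh hinv hq r hr
    have hy : pvCell rmc (iN : Int) ((s : Nat) : Int) = some y := by
      have h0 := hxs 0 (by simp)
      simpa using h0
    have hcast : ((s : Nat) : Int) + 1 = (((s + 1 : Nat)) : Int) := by push_cast; ring
    rw [PySem.List.enumerate_cons, List.foldl_cons, hcast] at hr
    have hxs' : ∀ (k : Nat), k < ys.length →
        pvCell rmc (iN : Int) (((s + 1) + k : Nat) : Int) = ys[k]?.map (fun c => c) := by
      intro k hk
      have hx1 := hxs (k + 1) (by simpa using Nat.succ_lt_succ hk)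
      rw [show s + (k + 1) = s + 1 + k from by omega] at hx1
      simpa using hx1
    have hend' : (s + 1) + ys.length = h := by
      simp only [List.length_cons] at hend
      omega
    have hsB : s < h := by
      simp only [List.length_cons] at hend
      omega
    have hlen_goal : s + (y :: ys).length = (s + 1) + ys.length := by
      simp only [List.length_cons]
      omega
    have hinbis : pvInb w h ((iN : Int), ((s : Nat) : Int)) := by
      unfold pvInb
      dsimp only
      refine ⟨by positivity, by exact_mod_cast hiW, by positivity, by exact_mod_cast hsB⟩
    by_cases hD : y = 'D'
    · subst hD
      have hF : (if (((s : Nat) : Int), 'D').2 = 'D'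
            then (q ++ [((iN : Int), (((s : Nat) : Int), 'D').1)], m)
            else if (((s : Nat) : Int), 'D').2 = 'X' then
              (q, (PySem.List.pyRange (-1) 2 1).foldl (fun mm dx =>
                (PySem.List.pyRange (-1) 2 1).foldl (fun mm2 dy =>
                    if 0 ≤ (iN : Int) + dx ∧ (iN : Int) + dx < (w : Int)
                        ∧ 0 ≤ (((s : Nat) : Int), 'D').1 + dy
                        ∧ (((s : Nat) : Int), 'D').1 + dy < (h : Int)
                        ∧ pvCell rmc ((iN : Int) + dx) ((((s : Nat) : Int), 'D').1 + dy) = some '.'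
                    then pvSet2 mm2 ((iN : Int) + dx) ((((s : Nat) : Int), 'D').1 + dy) 'S' else mm2) mm)
                (pvSet2 m (iN : Int) (((s : Nat) : Int), 'D').1 'X'))
            else (q, m))
          = (q ++ [((iN : Int), ((s : Nat) : Int))], m) := by
        simp
      rw [hF] at hr
      have hinv' : ∀ p, pvInb w h p →
          pvCell m p.1 p.2 = some (pvDChar rmc w h (iN : Int) (((s + 1 : Nat)) : Int) p) := by
        intro p hp
        rw [← hcast, pvDChar_succ_notX rmc w h
          (by rw [hy]; exact fun hc => absurd (Option.some.inj hc) (by decide)) p]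
        exact hinv p hp
      have hq' : q ++ [((iN : Int), ((s : Nat) : Int))] = pvSeedsUpto rmc h iN (s + 1) := by
        rw [hq, pvSeedsUpto_succ_col, if_pos hy]
      obtain ⟨c1, c2, c3⟩ := ih (s + 1) _ m hxs' hend' hsh hinv' hq' r hr
      exact ⟨c1, by rw [hlen_goal]; exact c2, by rw [hlen_goal]; exact c3⟩
    · by_cases hX : y = 'X'
      · subst hX
        -- the step writes 'X' at (iN, s) and dilates 'S' into the 8-neighbourhood
        have hF : (if (((s : Nat) : Int), 'X').2 = 'D'
              then (q ++ [((iN : Int), (((s : Nat) : Int), 'X').1)], m)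
              else if (((s : Nat) : Int), 'X').2 = 'X' then
                (q, (PySem.List.pyRange (-1) 2 1).foldl (fun mm dx =>
                  (PySem.List.pyRange (-1) 2 1).foldl (fun mm2 dy =>
                      if 0 ≤ (iN : Int) + dx ∧ (iN : Int) + dx < (w : Int)
                          ∧ 0 ≤ (((s : Nat) : Int), 'X').1 + dy
                          ∧ (((s : Nat) : Int), 'X').1 + dy < (h : Int)
                          ∧ pvCell rmc ((iN : Int) + dx) ((((s : Nat) : Int), 'X').1 + dy) = some '.'
                      then pvSet2 mm2 ((iN : Int) + dx) ((((s : Nat) : Int), 'X').1 + dy) 'S' else mm2) mm)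
                  (pvSet2 m (iN : Int) (((s : Nat) : Int), 'X').1 'X'))
              else (q, m))
            = (q, (PySem.List.pyRange (-1) 2 1).foldl (fun mm dx =>
                (PySem.List.pyRange (-1) 2 1).foldl (fun mm2 dy =>
                    if 0 ≤ (iN : Int) + dx ∧ (iN : Int) + dx < (w : Int)
                        ∧ 0 ≤ ((s : Nat) : Int) + dy ∧ ((s : Nat) : Int) + dy < (h : Int)
                        ∧ pvCell rmc ((iN : Int) + dx) (((s : Nat) : Int) + dy) = some '.'
                    then pvSet2 mm2 ((iN : Int) + dx) (((s : Nat) : Int) + dy) 'S' else mm2) mm)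
                (pvSet2 m (iN : Int) ((s : Nat) : Int) 'X')) := by
          simp
        rw [hF, pvNineFold] at hr
        have hsh1 : pvShape w h (pvSet2 m (iN : Int) ((s : Nat) : Int) 'X') :=
          pvShape_set2 hsh hinbis 'X'
        obtain ⟨hsh2, hcell2⟩ := pvCell_setS_fold rmc w h (iN : Int) ((s : Nat) : Int) pvOffs9
          (pvSet2 m (iN : Int) ((s : Nat) : Int) 'X') hsh1
        have hinv' : ∀ p, pvInb w h p →
            pvCell (pvOffs9.foldl (fun mm d =>
              if 0 ≤ (iN : Int) + d.1 ∧ (iN : Int) + d.1 < (w : Int) ∧ 0 ≤ ((s : Nat) : Int) + d.2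
                  ∧ ((s : Nat) : Int) + d.2 < (h : Int)
                  ∧ pvCell rmc ((iN : Int) + d.1) (((s : Nat) : Int) + d.2) = some '.'
              then pvSet2 mm ((iN : Int) + d.1) (((s : Nat) : Int) + d.2) 'S' else mm)
              (pvSet2 m (iN : Int) ((s : Nat) : Int) 'X')) p.1 p.2
            = some (pvDChar rmc w h (iN : Int) (((s + 1 : Nat)) : Int) p) := by
          intro p hp
          rw [hcell2 p.1 p.2 hp.1 hp.2.2.1, pvCell_set2 hsh hinbis 'X' hp.1 hp.2.2.1,
            ← hcast, pvDChar_succ rmc w h hinbis hy p]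
          by_cases hpx : p = ((iN : Int), ((s : Nat) : Int))
          · have hW : ¬ (∃ d ∈ pvOffs9, (iN : Int) + d.1 = p.1 ∧ ((s : Nat) : Int) + d.2 = p.2
                ∧ pvInb w h (p.1, p.2) ∧ pvCell rmc p.1 p.2 = some '.') := by
              rintro ⟨d, hd, he1, he2, hinb', hdot'⟩
              rw [hpx] at hdot'
              simp only at hdot'
              rw [hy] at hdot'
              exact absurd (Option.some.inj hdot') (by decide)
            have hE : p.1 = (iN : Int) ∧ p.2 = ((s : Nat) : Int) := by
              rw [hpx]
              exact ⟨rfl, rfl⟩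
            rw [if_neg hW, if_pos hE, if_pos ⟨hpx, rfl⟩]
          · have hC1 : ¬ (p = ((iN : Int), ((s : Nat) : Int)) ∧ ('X' : Char) = 'X') :=
              fun hc => hpx hc.1
            have hE : ¬ (p.1 = (iN : Int) ∧ p.2 = ((s : Nat) : Int)) := by
              intro hc
              exact hpx (Prod.ext_iff.2 ⟨hc.1, hc.2⟩)
            by_cases hdot : pvCell rmc p.1 p.2 = some '.'
            · by_cases hn : ∃ d ∈ pvOffs9, (p.1 + d.1, p.2 + d.2) = ((iN : Int), ((s : Nat) : Int))
              · have hW : ∃ d ∈ pvOffs9, (iN : Int) + d.1 = p.1 ∧ ((s : Nat) : Int) + d.2 = p.2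
                    ∧ pvInb w h (p.1, p.2) ∧ pvCell rmc p.1 p.2 = some '.' := by
                  obtain ⟨d, hd, he⟩ := (pvOffs9_symm ((iN : Int), ((s : Nat) : Int)) p).2 hn
                  rw [Prod.mk.injEq] at he
                  exact ⟨d, hd, he.1, he.2, hp, hdot⟩
                rw [if_pos hW, if_neg hC1, if_pos ⟨hdot, rfl, hn⟩]
              · have hW : ¬ (∃ d ∈ pvOffs9, (iN : Int) + d.1 = p.1 ∧ ((s : Nat) : Int) + d.2 = p.2
                    ∧ pvInb w h (p.1, p.2) ∧ pvCell rmc p.1 p.2 = some '.') := by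
                  rintro ⟨d, hd, he1, he2, hinb', hdot'⟩
                  refine hn ((pvOffs9_symm _ p).1 ⟨d, hd, ?_⟩)
                  rw [Prod.mk.injEq]
                  exact ⟨he1, he2⟩
                rw [if_neg hW, if_neg hE, if_neg hC1, if_neg (fun hc => hn hc.2.2), hinv p hp]
            · have hW : ¬ (∃ d ∈ pvOffs9, (iN : Int) + d.1 = p.1 ∧ ((s : Nat) : Int) + d.2 = p.2
                  ∧ pvInb w h (p.1, p.2) ∧ pvCell rmc p.1 p.2 = some '.') := by
                rintro ⟨d, hd, he1, he2, hinb', hdot'⟩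
                exact hdot hdot'
              rw [if_neg hW, if_neg hE, if_neg hC1, if_neg (fun hc => hdot hc.1), hinv p hp]
        have hnD : ¬ pvCell rmc (iN : Int) ((s : Nat) : Int) = some 'D' := by
          rw [hy]
          decide
        have hq' : q = pvSeedsUpto rmc h iN (s + 1) := by
          rw [hq, pvSeedsUpto_succ_col, if_neg hnD, List.append_nil]
        obtain ⟨c1, c2, c3⟩ := ih (s + 1) q _ hxs' hend' hsh2 hinv' hq' r hr
        exact ⟨c1, by rw [hlen_goal]; exact c2, by rw [hlen_goal]; exact c3⟩
      · -- any other character: nothing happens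
        have hF : (if (((s : Nat) : Int), y).2 = 'D'
              then (q ++ [((iN : Int), (((s : Nat) : Int), y).1)], m)
              else if (((s : Nat) : Int), y).2 = 'X' then
                (q, (PySem.List.pyRange (-1) 2 1).foldl (fun mm dx =>
                  (PySem.List.pyRange (-1) 2 1).foldl (fun mm2 dy =>
                      if 0 ≤ (iN : Int) + dx ∧ (iN : Int) + dx < (w : Int)
                          ∧ 0 ≤ (((s : Nat) : Int), y).1 + dy
                          ∧ (((s : Nat) : Int), y).1 + dy < (h : Int)
                          ∧ pvCell rmc ((iN : Int) + dx) ((((s : Nat) : Int), y).1 + dy) = some '.'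
                      then pvSet2 mm2 ((iN : Int) + dx) ((((s : Nat) : Int), y).1 + dy) 'S' else mm2) mm)
                  (pvSet2 m (iN : Int) (((s : Nat) : Int), y).1 'X'))
              else (q, m))
            = (q, m) := by
          simp only []
          rw [if_neg (by simpa using hD), if_neg (by simpa using hX)]
        rw [hF] at hr
        have hinv' : ∀ p, pvInb w h p →
            pvCell m p.1 p.2 = some (pvDChar rmc w h (iN : Int) (((s + 1 : Nat)) : Int) p) := by
          intro p hp
          rw [← hcast, pvDChar_succ_notX rmc w h
            (by rw [hy]; exact fun hc => hX (Option.some.inj hc)) p]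
          exact hinv p hp
        have hnD : ¬ pvCell rmc (iN : Int) ((s : Nat) : Int) = some 'D' := by
          rw [hy]
          exact fun hc => hD (Option.some.inj hc)
        have hq' : q = pvSeedsUpto rmc h iN (s + 1) := by
          rw [hq, pvSeedsUpto_succ_col, if_neg hnD, List.append_nil]
        obtain ⟨c1, c2, c3⟩ := ih (s + 1) q m hxs' hend' hsh hinv' hq' r hr
        exact ⟨c1, by rw [hlen_goal]; exact c2, by rw [hlen_goal]; exact c3⟩

lemma pvDilTail (rmc : List (List Char)) (w h : Nat) (iI : Int) :
    ∀ (xs : List Char) (sI : Int) (st : List (Int × Int) × List (List Char)),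
      (∀ c ∈ xs, ¬ (c = 'D' ∨ c = 'X')) →
      (PySem.List.enumerate xs sI).foldl (fun st2 jy =>
        if jy.2 = 'D' then (st2.1 ++ [(iI, jy.1)], st2.2)
        else if jy.2 = 'X' then
          (st2.1, (PySem.List.pyRange (-1) 2 1).foldl (fun mm dx =>
            (PySem.List.pyRange (-1) 2 1).foldl (fun mm2 dy =>
                if 0 ≤ iI + dx ∧ iI + dx < (w : Int) ∧ 0 ≤ jy.1 + dy ∧ jy.1 + dy < (h : Int)
                    ∧ pvCell rmc (iI + dx) (jy.1 + dy) = some '.'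
                then pvSet2 mm2 (iI + dx) (jy.1 + dy) 'S' else mm2) mm)
            (pvSet2 st2.2 iI jy.1 'X'))
        else st2) st = st := by
  intro xs
  induction xs with
  | nil =>
    intro sI st _
    rw [PySem.List.enumerate_nil, List.foldl_nil]
  | cons y ys ih =>
    intro sI st hben
    rw [PySem.List.enumerate_cons, List.foldl_cons]
    have hy := hben y List.mem_cons_self
    have hstep : (if ((sI, y) : Int × Char).2 = 'D' then (st.1 ++ [(iI, ((sI, y) : Int × Char).1)], st.2)
        else if ((sI, y) : Int × Char).2 = 'X' then
          (st.1, (PySem.List.pyRange (-1) 2 1).foldl (fun mm dx =>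
            (PySem.List.pyRange (-1) 2 1).foldl (fun mm2 dy =>
                if 0 ≤ iI + dx ∧ iI + dx < (w : Int) ∧ 0 ≤ ((sI, y) : Int × Char).1 + dy
                    ∧ ((sI, y) : Int × Char).1 + dy < (h : Int)
                    ∧ pvCell rmc (iI + dx) (((sI, y) : Int × Char).1 + dy) = some '.'
                then pvSet2 mm2 (iI + dx) (((sI, y) : Int × Char).1 + dy) 'S' else mm2) mm)
            (pvSet2 st.2 iI ((sI, y) : Int × Char).1 'X'))
        else st) = st := by
      dsimp only
      rw [if_neg (fun hc => hy (Or.inl hc)), if_neg (fun hc => hy (Or.inr hc))]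
    rw [hstep]
    exact ih (sI + 1) st (fun c hc => hben c (List.mem_cons_of_mem _ hc))

lemma pvDilOuter (rmc : List (List Char)) (w h : Nat)
    (hrowsOK : ∀ r ∈ rmc, h ≤ r.length ∧ ∀ c ∈ r.drop h, ¬ (c = 'D' ∨ c = 'X')) :
    ∀ (rows : List (List Char)) (sN : Nat) (q : List (Int × Int)) (m : List (List Char)),
      (∀ (k : Nat), k < rows.length → PySem.List.pyGet? rmc ((sN + k : Nat) : Int) = rows[k]?) →
      sN + rows.length = w →
      pvShape w h m →
      (∀ p, pvInb w h p → pvCell m p.1 p.2 = some (pvDChar rmc w h ((sN : Nat) : Int) 0 p)) →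
      q = pvSeedsUpto rmc h sN 0 →
      ∀ r, r = (PySem.List.enumerate rows ((sN : Nat) : Int)).foldl (fun st ix =>
          (PySem.List.enumerate ix.2).foldl (fun st2 jy =>
            if jy.2 = 'D' then (st2.1 ++ [(ix.1, jy.1)], st2.2)
            else if jy.2 = 'X' then
              (st2.1, (PySem.List.pyRange (-1) 2 1).foldl (fun mm dx =>
                (PySem.List.pyRange (-1) 2 1).foldl (fun mm2 dy =>
                    if 0 ≤ ix.1 + dx ∧ ix.1 + dx < (w : Int) ∧ 0 ≤ jy.1 + dy ∧ jy.1 + dy < (h : Int)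
                        ∧ pvCell rmc (ix.1 + dx) (jy.1 + dy) = some '.'
                    then pvSet2 mm2 (ix.1 + dx) (jy.1 + dy) 'S' else mm2) mm)
                (pvSet2 st2.2 ix.1 jy.1 'X'))
            else st2) st) (q, m) →
      pvShape w h r.2 ∧
      (∀ p, pvInb w h p →
        pvCell r.2 p.1 p.2 = some (pvDChar rmc w h ((sN + rows.length : Nat) : Int) 0 p)) ∧
      r.1 = pvSeedsUpto rmc h (sN + rows.length) 0 := by
  intro rows
  induction rows with
  | nil =>
    intro sN q m hrows hend hsh hinv hq r hr
    rw [PySem.List.enumerate_nil, List.foldl_nil] at hr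
    subst hr
    exact ⟨hsh, by simpa using hinv, by simpa using hq⟩
  | cons row rest ih =>
    intro sN q m hrows hend hsh hinv hq r hr
    have hrow0 : PySem.List.pyGet? rmc ((sN : Nat) : Int) = some row := by
      have h0 := hrows 0 (by simp)
      simpa using h0
    have hsW : sN < w := by
      simp only [List.length_cons] at hend
      omega
    obtain ⟨hge, hben⟩ := hrowsOK row
      (PySem.List.mem_of_pyGet?_eq_some (xs := rmc) (i := ((sN : Nat) : Int)) hrow0)
    have htakelen : (row.take h).length = h := by
      rw [List.length_take]
      omega
    have hcast : ((sN : Nat) : Int) + 1 = (((sN + 1 : Nat)) : Int) := by push_cast; ring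
    rw [PySem.List.enumerate_cons, List.foldl_cons, hcast] at hr
    -- a row is its first h cells followed by a tail without 'D'/'X': the tail does nothing
    have hfull : (PySem.List.enumerate row ((0 : Nat) : Int)).foldl (fun st2 jy =>
          if jy.2 = 'D' then (st2.1 ++ [((sN : Int), jy.1)], st2.2)
          else if jy.2 = 'X' then
            (st2.1, (PySem.List.pyRange (-1) 2 1).foldl (fun mm dx =>
              (PySem.List.pyRange (-1) 2 1).foldl (fun mm2 dy =>
                  if 0 ≤ (sN : Int) + dx ∧ (sN : Int) + dx < (w : Int) ∧ 0 ≤ jy.1 + dy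
                      ∧ jy.1 + dy < (h : Int) ∧ pvCell rmc ((sN : Int) + dx) (jy.1 + dy) = some '.'
                  then pvSet2 mm2 ((sN : Int) + dx) (jy.1 + dy) 'S' else mm2) mm)
              (pvSet2 st2.2 (sN : Int) jy.1 'X'))
          else st2) (q, m)
        = (PySem.List.enumerate (row.take h) ((0 : Nat) : Int)).foldl (fun st2 jy =>
          if jy.2 = 'D' then (st2.1 ++ [((sN : Int), jy.1)], st2.2)
          else if jy.2 = 'X' then
            (st2.1, (PySem.List.pyRange (-1) 2 1).foldl (fun mm dx =>
              (PySem.List.pyRange (-1) 2 1).foldl (fun mm2 dy =>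
                  if 0 ≤ (sN : Int) + dx ∧ (sN : Int) + dx < (w : Int) ∧ 0 ≤ jy.1 + dy
                      ∧ jy.1 + dy < (h : Int) ∧ pvCell rmc ((sN : Int) + dx) (jy.1 + dy) = some '.'
                  then pvSet2 mm2 ((sN : Int) + dx) (jy.1 + dy) 'S' else mm2) mm)
              (pvSet2 st2.2 (sN : Int) jy.1 'X'))
          else st2) (q, m) := by
      conv_lhs => rw [← List.take_append_drop h row]
      rw [PySem.List.enumerate_append, List.foldl_append]
      exact pvDilTail rmc w h (sN : Int) (row.drop h) _ _ hben
    -- characterise the one-row step with the inner lemma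
    obtain ⟨s1, s2, s3⟩ := pvDilInner rmc w h sN hsW (row.take h) 0 q m
      (by
        intro k hk
        unfold pvCell
        rw [show ((0 + k : Nat) : Int) = ((k : Nat) : Int) from by push_cast; ring, hrow0]
        rw [htakelen] at hk
        simp [PySem.List.pyGet?_natCast, List.getElem?_take, hk])
      (by
        rw [htakelen]
        omega)
      hsh
      (by simpa using hinv)
      (by simpa using hq)
      _ rfl
    rw [show (0 + (row.take h).length) = h from by rw [htakelen]; omega] at s2 s3
    rw [← hfull] at s1 s3
    have hinv' : ∀ p, pvInb w h p →
        pvCell ((PySem.List.enumerate row ((0 : Nat) : Int)).foldl (fun st2 jy =>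
          if jy.2 = 'D' then (st2.1 ++ [((sN : Int), jy.1)], st2.2)
          else if jy.2 = 'X' then
            (st2.1, (PySem.List.pyRange (-1) 2 1).foldl (fun mm dx =>
              (PySem.List.pyRange (-1) 2 1).foldl (fun mm2 dy =>
                  if 0 ≤ (sN : Int) + dx ∧ (sN : Int) + dx < (w : Int) ∧ 0 ≤ jy.1 + dy
                      ∧ jy.1 + dy < (h : Int) ∧ pvCell rmc ((sN : Int) + dx) (jy.1 + dy) = some '.'
                  then pvSet2 mm2 ((sN : Int) + dx) (jy.1 + dy) 'S' else mm2) mm)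
              (pvSet2 st2.2 (sN : Int) jy.1 'X'))
          else st2) (q, m)).2 p.1 p.2
        = some (pvDChar rmc w h (((sN + 1 : Nat)) : Int) 0 p) := by
      intro p hp
      rw [hfull, s2 p hp, pvDChar_row_end rmc w h (sN : Int) hp, hcast]
    have hq' : ((PySem.List.enumerate row ((0 : Nat) : Int)).foldl (fun st2 jy =>
          if jy.2 = 'D' then (st2.1 ++ [((sN : Int), jy.1)], st2.2)
          else if jy.2 = 'X' then
            (st2.1, (PySem.List.pyRange (-1) 2 1).foldl (fun mm dx =>
              (PySem.List.pyRange (-1) 2 1).foldl (fun mm2 dy =>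
                  if 0 ≤ (sN : Int) + dx ∧ (sN : Int) + dx < (w : Int) ∧ 0 ≤ jy.1 + dy
                      ∧ jy.1 + dy < (h : Int) ∧ pvCell rmc ((sN : Int) + dx) (jy.1 + dy) = some '.'
                  then pvSet2 mm2 ((sN : Int) + dx) (jy.1 + dy) 'S' else mm2) mm)
              (pvSet2 st2.2 (sN : Int) jy.1 'X'))
          else st2) (q, m)).1 = pvSeedsUpto rmc h (sN + 1) 0 := by
      rw [s3, pvSeedsUpto_row_end]
    have hrows' : ∀ (k : Nat), k < rest.length →
        PySem.List.pyGet? rmc (((sN + 1) + k : Nat) : Int) = rest[k]? := by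
      intro k hk
      have hx1 := hrows (k + 1) (by simpa using Nat.succ_lt_succ hk)
      rw [show sN + (k + 1) = sN + 1 + k from by omega] at hx1
      simpa using hx1
    have hend' : (sN + 1) + rest.length = w := by
      simp only [List.length_cons] at hend
      omega
    obtain ⟨c1, c2, c3⟩ := ih (sN + 1) _ _ hrows' hend' s1 hinv' hq' r
      (by rw [Prod.mk.eta]; exact hr)
    have hlen_goal : sN + (row :: rest).length = (sN + 1) + rest.length := by
      simp only [List.length_cons]
      omega
    exact ⟨c1, by rw [hlen_goal]; exact c2, by rw [hlen_goal]; exact c3⟩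

lemma pvDChar_zero (rmc : List (List Char)) (w h : Nat) (p : Int × Int) (hp : pvInb w h p) :
    pvDChar rmc w h ((0 : Nat) : Int) 0 p = '.' := by
  unfold pvDChar
  rw [if_neg, if_neg]
  · rintro ⟨hdot, d, hd, hinb', hX', hproc⟩
    rcases hproc with hlt | ⟨heq, hlt⟩
    · have := hinb'.1
      simp only at this ⊢
      omega
    · have := hinb'.2.2.1
      omega
  · rintro ⟨hX', hproc⟩
    rcases hproc with hlt | ⟨heq, hlt⟩
    · have := hp.1
      omega
    · have := hp.2.2.1
      omega

lemma pvDilB_eq_dchar (rmc : List (List Char)) (w h : Nat) (a b : Nat) (ha : a < w) :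
    pvDilB rmc w h a b = pvDChar rmc w h ((w : Nat) : Int) 0 ((a : Int), (b : Int)) := by
  have hproc : ∀ q : Int × Int, pvInb w h q → pvProcessed ((w : Nat) : Int) 0 q :=
    fun q hq => Or.inl hq.2.1
  unfold pvDilB pvDChar
  dsimp only
  by_cases hX : pvCell rmc (a : Int) (b : Int) = some 'X'
  · rw [if_pos hX, if_pos ⟨hX, Or.inl (show ((a : Nat) : Int) < ((w : Nat) : Int) from
      by exact_mod_cast ha)⟩]
  · rw [if_neg hX, if_neg (show ¬ (pvCell rmc ((a : Nat) : Int) ((b : Nat) : Int) = some 'X'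
        ∧ pvProcessed ((w : Nat) : Int) 0 (((a : Nat) : Int), ((b : Nat) : Int))) from
      fun hc => hX hc.1)]
    refine if_congr (and_congr Iff.rfl ?_) rfl rfl
    rw [List.any_eq_true]
    unfold pvHasXNbr
    constructor
    · rintro ⟨d, hd, hdec⟩
      rw [decide_eq_true_eq] at hdec
      obtain ⟨h1, h2, h3, h4, h5⟩ := hdec
      exact ⟨d, hd, ⟨h1, h2, h3, h4⟩, h5, Or.inl h2⟩
    · rintro ⟨d, hd, hinb', hX', hproc'⟩
      refine ⟨d, hd, ?_⟩
      rw [decide_eq_true_eq]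
      exact ⟨hinb'.1, hinb'.2.1, hinb'.2.2.1, hinb'.2.2.2, hX'⟩

lemma pvCell_baseB (rmc : List (List Char)) (w h : Nat) {a b : Nat} (ha : a < w) (hb : b < h) :
    pvCell ((List.range w).map (fun i => (List.range h).map (fun j => pvDilB rmc w h i j)))
      ((a : Nat) : Int) ((b : Nat) : Int) = some (pvDilB rmc w h a b) := by
  rw [pvCell_nonneg _ (by positivity) (by positivity)]
  simp [Int.toNat_natCast, List.getElem?_map, List.getElem?_range, ha, hb]

lemma pvSeedsUpto_full (rmc : List (List Char)) (w h : Nat) :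
    pvSeedsUpto rmc h w 0 = (List.range w).flatMap (fun i =>
      ((List.range h).filter (fun j => pvCell rmc ((i : Nat) : Int) ((j : Nat) : Int) = some 'D')).map
        (fun j => (((i : Nat) : Int), ((j : Nat) : Int)))) := by
  unfold pvSeedsUpto pvSeedsRow
  simp

lemma pvSeedsUpto_inb (rmc : List (List Char)) (w h : Nat) :
    ∀ x ∈ pvSeedsUpto rmc h w 0, pvInb w h x := by
  intro x hx
  rw [pvSeedsUpto_full] at hx
  obtain ⟨i, hi, hx'⟩ := List.mem_flatMap.1 hx
  obtain ⟨j, hj, rfl⟩ := List.mem_map.1 hx'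
  rw [List.mem_range] at hi
  have hj' : j < h := by
    have := List.mem_filter.1 hj
    simpa using List.mem_range.1 this.1
  unfold pvInb
  dsimp only
  exact ⟨by positivity, by exact_mod_cast hi, by positivity, by exact_mod_cast hj'⟩

lemma pvInb_of_lt {w h : Nat} {a b : Nat} (ha : a < w) (hb : b < h) :
    pvInb w h (((a : Nat) : Int), ((b : Nat) : Int)) := by
  unfold pvInb
  dsimp only
  exact ⟨by positivity, by exact_mod_cast ha, by positivity, by exact_mod_cast hb⟩

lemma pvCell_baseB' (rmc : List (List Char)) (w h : Nat) {p : Int × Int} (hp : pvInb w h p) :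
    pvCell ((List.range w).map (fun i => (List.range h).map (fun j => pvDilB rmc w h i j))) p.1 p.2
      = some (pvDChar rmc w h ((w : Nat) : Int) 0 p) := by
  obtain ⟨p1, p2⟩ := p
  obtain ⟨h1, h2, h3, h4⟩ := hp
  simp only at h1 h2 h3 h4
  have e1 : p1 = ((p1.toNat : Nat) : Int) := by omega
  have e2 : p2 = ((p2.toNat : Nat) : Int) := by omega
  have ha : p1.toNat < w := by omega
  have hb : p2.toNat < h := by omega
  rw [e1, e2]
  exact (pvCell_baseB rmc w h ha hb).trans
    (congrArg some (pvDilB_eq_dchar rmc w h p1.toNat p2.toNat ha))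

-- one cell of B's union loop, rewritten as a fold over that cell's (up to two) edges
lemma pvCellFold (base : List (List Char)) (w h : Nat) (i j : Nat) (p : List Nat) :
    (if pvCell base ((i : Nat) : Int) ((j : Nat) : Int) = some '.' then
        let p1 := if i + 1 < w ∧ pvCell base (((i + 1 : Nat)) : Int) ((j : Nat) : Int) = some '.'
          then pvUnionUF p (i * h + j) ((i + 1) * h + j) else p
        if j + 1 < h ∧ pvCell base ((i : Nat) : Int) (((j + 1 : Nat)) : Int) = some '.'
          then pvUnionUF p1 (i * h + j) (i * h + j + 1) else p1
      else p)
    = (pvEdges base w h i j).foldl (fun q e => pvUnionUF q e.1 e.2) p := by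
  unfold pvEdges
  split_ifs <;> simp [List.foldl_cons, List.foldl_nil, List.foldl_append]

lemma pvGetD_range (n x : Nat) : (List.range n).getD x x = x := by
  rw [List.getD_eq_getElem?_getD]
  by_cases hx : x < n
  · simp [List.getElem?_range, hx]
  · rw [List.getElem?_eq_none (by simpa using hx)]
    rfl

theorem pv_core (rm : List String)
    (hrowsOK : ∀ r ∈ rm.map String.toList, (rm.headD "").length ≤ r.length ∧
      ∀ c ∈ r.drop ((rm.headD "").length), ¬ (c = 'D' ∨ c = 'X')) :
    finish_map rm = finish_map_alt rm := by
  simp only [finish_map, finish_map_alt]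
  set w := rm.length with hw
  set h := (rm.headD "").length with hh
  set rmc := rm.map String.toList with hrmc
  have hwlen : rmc.length = w := by simp [hrmc, hw]
  set stG := (PySem.List.enumerate rmc).foldl
    (fun (st : List (Int × Int) × List (List Char)) ix =>
      (PySem.List.enumerate ix.2).foldl
        (fun st2 jy =>
          if jy.2 = 'D' then (st2.1 ++ [(ix.1, jy.1)], st2.2)
          else if jy.2 = 'X' then
            (st2.1, (PySem.List.pyRange (-1) 2 1).foldl (fun mm dx =>
                (PySem.List.pyRange (-1) 2 1).foldl (fun mm2 dy =>
                    if 0 ≤ ix.1 + dx ∧ ix.1 + dx < (w : Int) ∧ 0 ≤ jy.1 + dy ∧ jy.1 + dy < (h : Int)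
                        ∧ pvCell rmc (ix.1 + dx) (jy.1 + dy) = some '.'
                    then pvSet2 mm2 (ix.1 + dx) (jy.1 + dy) 'S' else mm2) mm)
              (pvSet2 st2.2 ix.1 jy.1 'X'))
          else st2) st)
    (([] : List (Int × Int)), List.replicate w (List.replicate h '.')) with hstG
  set baseT := (List.range w).map (fun i => (List.range h).map (fun j => pvDilB rmc w h i j))
    with hbaseT
  -- dilation characterisation (A's first pass)
  obtain ⟨dsh, dcell0, dseeds0⟩ := pvDilOuter rmc w h hrowsOK rmc 0 []
    (List.replicate w (List.replicate h '.'))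
    (by
      intro k hk
      rw [show ((0 + k : Nat) : Int) = ((k : Nat) : Int) from by push_cast; ring]
      exact PySem.List.pyGet?_natCast rmc k)
    (by omega)
    (by
      constructor
      · simp
      · intro r hr
        rw [List.eq_of_mem_replicate hr]
        simp)
    (by
      intro p hp
      rw [pvCell_nonneg _ hp.1 hp.2.2.1, pvDChar_zero rmc w h p hp]
      have hp1 : p.1.toNat < w := by
        have := hp.2.1
        have := hp.1
        omega
      have hp2 : p.2.toNat < h := by
        have := hp.2.2.2
        have := hp.2.2.1
        omega
      simp [List.getElem?_replicate, hp1, hp2])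
    (by simp [pvSeedsUpto, pvSeedsRow])
    stG hstG
  have hcast0 : ((0 + rmc.length : Nat) : Int) = ((w : Nat) : Int) := by
    rw [show 0 + rmc.length = w from by omega]
  have dcell : ∀ p, pvInb w h p →
      pvCell stG.2 p.1 p.2 = some (pvDChar rmc w h ((w : Nat) : Int) 0 p) := by
    intro p hp
    rw [dcell0 p hp, hcast0]
  have dseeds : stG.1 = pvSeedsUpto rmc h w 0 := by
    rw [dseeds0, show 0 + rmc.length = w from by omega]
  have hseedsInb : ∀ x ∈ stG.1, pvInb w h x := by
    rw [dseeds]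
    exact pvSeedsUpto_inb rmc w h
  -- BFS characterisation (A's flood)
  obtain ⟨bsh, bcell⟩ := pvBfsA_spec baseT w h
    (5 * w * h + stG.1.length + 1) stG.1 PySem.Dict.empty stG.2 ∅
    (by
      intro p
      simp [PySem.Dict.getD_empty])
    hseedsInb
    (by simp)
    dsh
    (by
      intro p hp
      rw [if_neg (Finset.notMem_empty p), dcell p hp, hbaseT, pvCell_baseB' rmc w h hp])
    (by
      rw [Finset.sdiff_empty, card_pvGrid, ← Nat.mul_assoc]
      omega)
  -- B's union-find fold equals a fold over the explicit edge list
  set parentF := (List.range w).foldl (fun p i => (List.range h).foldl (fun p j =>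
      if pvCell baseT ((i : Nat) : Int) ((j : Nat) : Int) = some '.' then
        let p1 := if i + 1 < w ∧ pvCell baseT (((i + 1 : Nat)) : Int) ((j : Nat) : Int) = some '.'
          then pvUnionUF p (i * h + j) ((i + 1) * h + j) else p
        if j + 1 < h ∧ pvCell baseT ((i : Nat) : Int) (((j + 1 : Nat)) : Int) = some '.'
          then pvUnionUF p1 (i * h + j) (i * h + j + 1) else p1
      else p) p) (List.range (w * h)) with hparentF
  have hparent_edges : parentF
      = (pvAllEdges baseT w h).foldl (fun q e => pvUnionUF q e.1 e.2) (List.range (w * h)) := by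
    rw [hparentF]
    unfold pvAllEdges
    rw [pvFoldl_flatMap]
    have hfn : (fun (p : List Nat) (i : Nat) =>
        ((List.range h).flatMap (fun j => pvEdges baseT w h i j)).foldl
          (fun q e => pvUnionUF q e.1 e.2) p)
        = (fun (p : List Nat) (i : Nat) => (List.range h).foldl (fun p j =>
            if pvCell baseT ((i : Nat) : Int) ((j : Nat) : Int) = some '.' then
              let p1 := if i + 1 < w ∧ pvCell baseT (((i + 1 : Nat)) : Int) ((j : Nat) : Int) = some '.'
                then pvUnionUF p (i * h + j) ((i + 1) * h + j) else p
              if j + 1 < h ∧ pvCell baseT ((i : Nat) : Int) (((j + 1 : Nat)) : Int) = some '.'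
                then pvUnionUF p1 (i * h + j) (i * h + j + 1) else p1
            else p) p) := by
      funext p i
      rw [pvFoldl_flatMap]
      have hcellfn : (fun (p : List Nat) (j : Nat) =>
          (pvEdges baseT w h i j).foldl (fun q e => pvUnionUF q e.1 e.2) p)
          = (fun (p : List Nat) (j : Nat) =>
            if pvCell baseT ((i : Nat) : Int) ((j : Nat) : Int) = some '.' then
              let p1 := if i + 1 < w ∧ pvCell baseT (((i + 1 : Nat)) : Int) ((j : Nat) : Int) = some '.'
                then pvUnionUF p (i * h + j) ((i + 1) * h + j) else p
              if j + 1 < h ∧ pvCell baseT ((i : Nat) : Int) (((j + 1 : Nat)) : Int) = some '.'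
                then pvUnionUF p1 (i * h + j) (i * h + j + 1) else p1
            else p) := by
        funext p j
        exact (pvCellFold baseT w h i j p).symm
      rw [hcellfn]
    rw [hfn]
  have hedge_lt : ∀ e ∈ pvAllEdges baseT w h, e.1 < w * h ∧ e.2 < w * h := by
    intro e he
    obtain ⟨i, j, hi, hj, _, hcase⟩ := pvMem_allEdges.1 he
    rcases hcase with ⟨h1, _, rfl⟩ | ⟨h1, _, rfl⟩
    · exact ⟨pvIdx_lt hi hj, pvIdx_lt h1 hj⟩
    · refine ⟨pvIdx_lt hi hj, ?_⟩
      have := pvIdx_lt hi h1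
      omega
  obtain ⟨hlenF, hmonoF, hrootF⟩ := pvUF_fold (w * h) (pvAllEdges baseT w h)
    (List.range (w * h)) (fun _ _ => False) hedge_lt (by simp)
    (fun x => le_of_eq (pvGetD_range _ x))
    (by
      intro x y
      rw [pvRoot_of_fix (pvGetD_range _ x), pvRoot_of_fix (pvGetD_range _ y), pvEqvGen_bot])
  have hrootIff : ∀ x y, pvRoot parentF x = pvRoot parentF y ↔
      Relation.EqvGen (pvERel (pvAllEdges baseT w h)) x y := by
    intro x y
    rw [hparent_edges, hrootF x y]
    exact pvEqvGen_congr (fun u v => iff_of_eq (false_or _)) x y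
  -- ship roots of B
  set shipRootsT : PySem.Set Nat := PySem.Set.ofList ((List.range w).flatMap (fun i =>
      ((List.range h).filter (fun j => pvCell rmc ((i : Nat) : Int) ((j : Nat) : Int) = some 'D')).map
        (fun j => pvRoot parentF (i * h + j)))) with hshipT
  have hship : ∀ r : Nat, PySem.Set.contains shipRootsT r = true ↔
      ∃ a b : Nat, a < w ∧ b < h ∧ pvCell rmc ((a : Nat) : Int) ((b : Nat) : Int) = some 'D'
        ∧ pvRoot parentF (a * h + b) = r := by
    intro r
    rw [PySem.Set.contains_iff, hshipT, PySem.Set.mem_ofList]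
    simp only [List.mem_flatMap, List.mem_map, List.mem_filter, List.mem_range,
      decide_eq_true_eq]
    constructor
    · rintro ⟨a, ha, b, ⟨hb, hD⟩, hr⟩
      exact ⟨a, b, ha, hb, hD, hr⟩
    · rintro ⟨a, b, ha, hb, hD, hr⟩
      exact ⟨a, ha, b, ⟨hb, hD⟩, hr⟩
  have hseed_base : ∀ a b : Nat, a < w → b < h →
      pvCell rmc ((a : Nat) : Int) ((b : Nat) : Int) = some 'D' →
      pvCell baseT ((a : Nat) : Int) ((b : Nat) : Int) = some '.' := by
    intro a b ha hb hD
    rw [hbaseT, pvCell_baseB rmc w h ha hb]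
    congr 1
    unfold pvDilB
    rw [if_neg (by rw [hD]; simp), if_neg ?_]
    rintro ⟨hc, _⟩
    rw [hD] at hc
    exact absurd (Option.some.inj hc) (by decide)
  have hmem_seed : ∀ u, u ∈ stG.1 ↔ ∃ a b : Nat, a < w ∧ b < h
      ∧ pvCell rmc ((a : Nat) : Int) ((b : Nat) : Int) = some 'D'
      ∧ u = (((a : Nat) : Int), ((b : Nat) : Int)) := by
    intro u
    rw [dseeds, pvSeedsUpto_full]
    simp only [List.mem_flatMap, List.mem_map, List.mem_filter, List.mem_range,
      decide_eq_true_eq]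
    constructor
    · rintro ⟨a, ha, b, ⟨hb, hD⟩, hu⟩
      exact ⟨a, b, ha, hb, hD, hu.symm⟩
    · rintro ⟨a, b, ha, hb, hD, rfl⟩
      exact ⟨a, ha, b, ⟨hb, hD⟩, rfl⟩
  -- the decisive per-cell equivalence: B's root lookup answers exactly A's closure question
  have hkey : ∀ i j : Nat, i < w → j < h →
      ((pvCell baseT ((i : Nat) : Int) ((j : Nat) : Int) = some '.'
          ∧ PySem.Set.contains shipRootsT (pvRoot parentF (i * h + j)) = true)
        ↔ pvClosure baseT w h stG.1 ∅ (((i : Nat) : Int), ((j : Nat) : Int))) := by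
    intro i j hi hj
    constructor
    · rintro ⟨hdot, hcont⟩
      obtain ⟨a, b, ha, hb, hD, hr⟩ := (hship _).1 hcont
      have heqv := (hrootIff (a * h + b) (i * h + j)).1 hr
      rcases pvEqv_decode heqv with heq | ⟨c, d, hc, hd, e1, e2, hconn⟩
      · obtain ⟨ea, eb⟩ := pvIdx_inj hb hj heq
        subst ea
        subst eb
        exact Or.inr ⟨_, (hmem_seed _).2 ⟨a, b, ha, hb, hD, rfl⟩, Finset.notMem_empty _,
          Relation.ReflTransGen.refl⟩
      · obtain ⟨ea, eb⟩ := pvIdx_inj hb hc.2.1 e1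
        obtain ⟨ei, ej⟩ := pvIdx_inj hj hd.2.1 e2
        have hceq : c = (a, b) := Prod.ext_iff.2 ⟨ea.symm, eb.symm⟩
        have hdeq : d = (i, j) := Prod.ext_iff.2 ⟨ei.symm, ej.symm⟩
        subst hceq
        subst hdeq
        exact Or.inr ⟨_, (hmem_seed _).2 ⟨a, b, ha, hb, hD, rfl⟩, Finset.notMem_empty _,
          pvRTG_of_N hconn⟩
    · rintro (habs | ⟨u, hu, _, hrtg⟩)
      · exact absurd habs (Finset.notMem_empty _)
      · obtain ⟨a, b, ha, hb, hD, rfl⟩ := (hmem_seed u).1 hu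
        have hain : pvInbN baseT w h (a, b) := ⟨ha, hb, hseed_base a b ha hb hD⟩
        obtain ⟨d, hdin, hpd, hconn⟩ := pvRTG_to_N hain hrtg
        have ei : i = d.1 := by
          have := congrArg Prod.fst hpd
          simpa using this
        have ej : j = d.2 := by
          have := congrArg Prod.snd hpd
          simpa using this
        constructor
        · rw [ei, ej]
          exact hdin.2.2
        · refine (hship _).2 ⟨a, b, ha, hb, hD, ?_⟩
          refine ((hrootIff _ _).2 ?_).symm
          have henc := pvConn_encode hconn
          rw [ei, ej]
          simpa using henc.symm
  -- final grids agree cell by cell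
  set mf := pvBfsA (w : Int) (h : Int) (5 * w * h + stG.1.length + 1) stG.1
    PySem.Dict.empty stG.2 with hmf
  have hmflen : mf.length = w := bsh.1
  apply List.ext_getElem
  · simp only [List.length_map, List.length_range, hmflen]
  · intro i hi1 hi2
    have hiw : i < w := by
      simp only [List.length_map, hmflen] at hi1
      exact hi1
    have him : i < mf.length := by rw [hmflen]; exact hiw
    simp only [List.getElem_map, List.getElem_range]
    congr 1
    have hrowlen : mf[i].length = h := bsh.2 _ (List.getElem_mem him)
    apply List.ext_getElem
    · simp only [List.length_map, List.length_range, hrowlen]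
    · intro j hj1 hj2
      have hjh : j < h := by
        simp only [List.length_map, hrowlen] at hj1
        exact hj1
      have hjm : j < mf[i].length := by rw [hrowlen]; exact hjh
      simp only [List.getElem_map, List.getElem_range]
      have hinb : pvInb w h (((i : Nat) : Int), ((j : Nat) : Int)) := pvInb_of_lt hiw hjh
      have hcellmf : pvCell mf ((i : Nat) : Int) ((j : Nat) : Int) = some (mf[i][j]) := by
        rw [pvCell_nonneg _ (by positivity) (by positivity)]
        simp only [Int.toNat_natCast]
        rw [List.getElem?_eq_getElem him]
        simp only [Option.bind_some]
        rw [List.getElem?_eq_getElem hjm]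
      by_cases hC : pvClosure baseT w h stG.1 ∅ (((i : Nat) : Int), ((j : Nat) : Int))
      · have hD : mf[i][j] = 'D' :=
          Option.some.inj (hcellmf.symm.trans ((bcell _ hinb).1 hC))
        rw [hD, if_pos ((hkey i j hiw hjh).2 hC)]
        decide
      · have hB : pvCell mf ((i : Nat) : Int) ((j : Nat) : Int)
            = pvCell baseT ((i : Nat) : Int) ((j : Nat) : Int) := (bcell _ hinb).2 hC
        have hbase : pvCell baseT ((i : Nat) : Int) ((j : Nat) : Int)
            = some (pvDChar rmc w h ((w : Nat) : Int) 0 (((i : Nat) : Int), ((j : Nat) : Int))) := by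
          rw [hbaseT]
          exact pvCell_baseB' rmc w h hinb
        have hval : mf[i][j]
            = pvDChar rmc w h ((w : Nat) : Int) 0 (((i : Nat) : Int), ((j : Nat) : Int)) :=
          Option.some.inj (hcellmf.symm.trans (hB.trans hbase))
        have hnB : ¬ (pvCell baseT ((i : Nat) : Int) ((j : Nat) : Int) = some '.'
            ∧ PySem.Set.contains shipRootsT (pvRoot parentF (i * h + j)) = true) :=
          fun hc => hC ((hkey i j hiw hjh).1 hc)
        rw [hval, if_neg hnB]
        by_cases hdot : pvDChar rmc w h ((w : Nat) : Int) 0 (((i : Nat) : Int), ((j : Nat) : Int)) = '.'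
        · rw [if_pos hdot, if_pos (by rw [hbase, hdot])]
        · rw [if_neg hdot, if_neg (fun hc => hdot (Option.some.inj (hbase.symm.trans hc))), hbase]
          simp

theorem pv_main (rm : List String) (hpre : Pre_finish_map rm) :
    finish_map rm = finish_map_alt rm := by
  obtain ⟨hne, hlen⟩ := hpre
  have hhead : (rm.headD "").toList.length = (rm.headD "").length := by
    simp
  refine pv_core rm ?_
  intro r hr
  obtain ⟨sstr, hs, rfl⟩ := List.mem_map.1 hr
  obtain ⟨h1, h2⟩ := hlen sstr hs
  rw [hhead] at h1 h2
  refine ⟨h1, fun c hc => ?_⟩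
  have hb := List.all_eq_true.1 h2 c hc
  simpa using hb

-- ===== VERDICT (by name: the statement is the Claim_ definition above) =====
theorem finish_map_spec : Claim_equal_finish_map := by
  intro regional_map _hdom hpre
  unfold Spec_finish_map
  exact pv_main regional_map hpre
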